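-- pv_equiv track=rewrite | github.com/dshemetov/leetcode | python/p25.py | p2493
-- ===== SOURCE A (Python) =====
-- from collections import defaultdict, deque
--
-- def p2493(n: int, edges: list[list[int]]) -> int:
--     """
--     2493. Divide Nodes Into The Maximum Number of Groups https://leetcode.com/problems/divide-nodes-into-the-maximum-number-of-groups/
--
--     Lessons learned:
--     - This problem is a pretty straightforward extension of (785 Bipartite Graph
--     Checking).
--     - I spent a good 30-45 minutes not realizing that I was returning the minimum
--     groups instead of maximum. Derp.
--     - Checking only nodes with minimum degree <= node degree <= minimum degree + 1
--     in a given partition yields a substantial savings (98 percentile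
--     performance), but I don't quite know if this is a general property or just a
--     heuristic that helps on this particular test set. The intuition is that we
--     can maximize graph diameter by starting at a leaf, leaves have degree 1, and
--     so maybe looking for the smallest degree nodes leads us to outer boundary of
--     a graph. Not sure.
--
--     Examples:
--     >>> p2493(6, [[1,2],[1,4],[1,5],[2,6],[2,3],[4,6]])
--     4
--     >>> p2493(3, [[1,2],[2,3],[3,1]])
--     -1
--     """
--     # Convert from edge list to adjacency list
--     graph = defaultdict(list)
--
--     for u, v in edges:
--         graph[u - 1].append(v - 1)
--         graph[v - 1].append(u - 1)
--
--     # Find connected components (store the lowest index member)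
--     seen: set[int] = set()
--     partitions: dict[int, set[int]] = defaultdict(set)
--
--     def dfs_connected_components(node: int, partition: int):
--         if node not in seen:
--             seen.add(node)
--             partitions[partition].add(node)
--             for neighbor_node in graph[node]:
--                 dfs_connected_components(neighbor_node, partition)
--
--     for node in range(n):
--         if node not in seen:
--             dfs_connected_components(node, node)
--
--     # Get a coloring for each connected component {partition: {node: color}}
--     coloring = {}
--
--     def bfs_coloring(root: int) -> bool:
--         queue: deque[tuple[int, int]] = deque()
--         queue.append((root, 0))
--         while queue:
--             node, color = queue.popleft()
--
--             if node not in coloring: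
--                 coloring[node] = color
--
--                 for neighbor_node in graph[node]:
--                     if neighbor_node in coloring and (coloring[neighbor_node] - color - 1) % 2 == 1:
--                         return False
--                     if neighbor_node not in coloring:
--                         queue.append((neighbor_node, color + 1))
--
--         return True
--
--     # Do BFS from every node, building a spanning tree, and looking for the maximum depth achieved
--     result = 0
--     max_coloring = -1
--     for _, partition_nodes in partitions.items():
--         for node in partition_nodes:
--             if not bfs_coloring(node):
--                 return -1
--
--             max_coloring = max(max_coloring, max(coloring.values()) + 1)
--             coloring = {}
--         result += max_coloring
--         max_coloring = -1
--
--     # A little degree checking heuristic that gives a big boost, but might not work in general.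
--     # result = 0
--     # max_coloring = -1
--     # for _, partition_nodes in partitions.items():
--     #     min_degree = min(len(graph[node]) for node in partition_nodes)
--     #     check_nodes = [node for node in partition_nodes if len(graph[node]) <= min_degree + 1]
--
--     #     for node in check_nodes:
--     #         if not bfs_coloring(node):
--     #             return -1
--     #         else:
--     #             max_coloring = max(max_coloring, max(coloring.values()) + 1)
--     #             coloring = defaultdict(dict)
--     #     result += max_coloring
--     #     max_coloring = -1
--
--     return result
-- ===== SOURCE B (Python) =====
-- def _bfs_levels(adj, s):
--     """BFS from s: level (distance) of every node reachable from s, by frontier expansion."""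
--     level = {s: 0}
--     frontier = [s]
--     d = 0
--     while frontier:
--         nxt = []
--         for u in frontier:
--             for w in adj.get(u, []):
--                 if w not in level:
--                     level[w] = d + 1
--                     nxt.append(w)
--         frontier = nxt
--         d += 1
--     return level
--
--
-- def p2493(n: int, edges: list[list[int]]) -> int:
--     # adjacency list (0-based)
--     adj = {}
--     for u, v in edges:
--         adj.setdefault(u - 1, []).append(v - 1)
--         adj.setdefault(v - 1, []).append(u - 1)
--
--     total = 0
--     seen = set()
--     for s in range(n):
--         if s in seen:
--             continue
--         # component of s, with BFS levels from s
--         level = _bfs_levels(adj, s)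
--         comp = list(level)
--         seen.update(comp)
--         # validity pass: an edge joining two nodes whose levels have equal parity
--         # closes an odd cycle, so no grouping exists
--         for u in comp:
--             for w in adj.get(u, []):
--                 if (level[u] + level[w]) % 2 == 0:
--                     return -1
--         # groups contributed by this component = 1 + its maximum eccentricity
--         total += 1 + max(max(_bfs_levels(adj, v).values()) for v in comp)
--     return total
-- ===== Notes on version B (the rewrite author's own statement) =====
-- stated objective: simpler
-- what changed: A discovers components with a recursive DFS and then runs one pop-marked BFS per node that simultaneously 2-colors and parity-checks; B discovers each component with a layered (frontier) BFS, runs one separate validity pass over the component's edges (equal level parity = odd cycle -> -1), and computes eccentricities with plain level BFS, summing 1+max eccentricity per component.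
import Mathlib
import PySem

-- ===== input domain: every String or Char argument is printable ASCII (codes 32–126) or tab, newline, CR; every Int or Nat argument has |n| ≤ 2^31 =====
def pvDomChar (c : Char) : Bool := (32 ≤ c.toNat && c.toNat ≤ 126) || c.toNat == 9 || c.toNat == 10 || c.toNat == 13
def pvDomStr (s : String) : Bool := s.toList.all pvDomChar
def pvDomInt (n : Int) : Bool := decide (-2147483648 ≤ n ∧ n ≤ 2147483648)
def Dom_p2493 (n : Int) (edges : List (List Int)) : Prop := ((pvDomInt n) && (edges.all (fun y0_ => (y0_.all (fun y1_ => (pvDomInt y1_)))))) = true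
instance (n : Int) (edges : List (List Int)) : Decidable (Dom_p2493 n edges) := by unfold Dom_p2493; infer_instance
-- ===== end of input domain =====

-- B replaces A's recursive-DFS components + per-node coloring BFS by layered BFS per
-- component, a separate bipartite validity pass, and plain level BFS for eccentricities.

-- ===== PORT A =====
-- graph[u-1].append(v-1); graph[v-1].append(u-1)  (defaultdict(list))
def pvGraphA (edges : List (List Int)) : PySem.Dict Int (List Int) :=
  edges.foldl (fun g e =>
    match e with
    | [u, v] =>
      let g1 := g.insert (u - 1) (g.getD (u - 1) [] ++ [v - 1])
      g1.insert (v - 1) (g1.getD (v - 1) [] ++ [u - 1])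
    | _ => g) PySem.Dict.empty

-- total adjacency mass + key count: used only to size the fuel of the loops below
def pvMassA (g : PySem.Dict Int (List Int)) : Nat :=
  (g.items.map (fun p => p.2.length)).sum + g.items.length

-- dfs_connected_components(node, partition): state = (seen, partitions)
def pvDfsA (g : PySem.Dict Int (List Int)) (pk : Int) :
    Nat → Int → PySem.Set Int × PySem.Dict Int (PySem.Set Int) →
    PySem.Set Int × PySem.Dict Int (PySem.Set Int)
  | 0, _, st => st
  | fuel+1, node, st =>
    if st.1.contains node then st
    else
      (g.getD node []).foldl (fun st' nb => pvDfsA g pk fuel nb st')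
        (PySem.Set.add st.1 node,
         st.2.modify pk PySem.Set.empty (fun s => PySem.Set.add s node))

-- inner `for neighbor_node in graph[node]` of bfs_coloring (early `return False` = none)
def pvScanA (col : PySem.Dict Int Int) (color : Int) :
    List Int → List (Int × Int) → Option (List (Int × Int))
  | [], q => some q
  | nb :: rest, q =>
    if col.contains nb && decide (PySem.Int.mod (col.getD nb 0 - color - 1) 2 = 1) then none
    else pvScanA col color rest (if col.contains nb then q else q ++ [(nb, color + 1)])

-- bfs_coloring: the while-queue loop; none = `return False` (fuel 0 is never reached)
def pvBfsA (g : PySem.Dict Int (List Int)) :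
    Nat → List (Int × Int) → PySem.Dict Int Int → Option (PySem.Dict Int Int)
  | 0, _, _ => none
  | _+1, [], col => some col
  | fuel+1, (node, color) :: q, col =>
    if col.contains node then pvBfsA g fuel q col
    else
      let col' := col.insert node color
      match pvScanA col' color (g.getD node []) q with
      | none => none
      | some q' => pvBfsA g fuel q' col'

-- `for node in partition_nodes` of the result loop; none = `return -1`
def pvCompA (g : PySem.Dict Int (List Int)) (fuel : Nat) :
    List Int → Int → Option Int
  | [], mc => some mc
  | v :: rest, mc =>
    match pvBfsA g fuel [(v, 0)] PySem.Dict.empty with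
    | none => none
    | some col =>
      pvCompA g fuel rest (max mc ((PySem.List.max? col.values (fun x => x)).getD 0 + 1))

-- `for _, partition_nodes in partitions.items()` of the result loop
def pvLoopA (g : PySem.Dict Int (List Int)) (fuel : Nat) :
    List (Int × PySem.Set Int) → Int → Int
  | [], res => res
  | (_, pset) :: rest, res =>
    match pvCompA g fuel pset (-1) with
    | none => -1
    | some mc => pvLoopA g fuel rest (res + mc)

def p2493 (n : Int) (edges : List (List Int)) : Int :=
  let g := pvGraphA edges
  let st := (PySem.List.pyRange 0 n 1).foldl
    (fun st node => if st.1.contains node then st else pvDfsA g node (pvMassA g + 3) node st)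
    (PySem.Set.empty, PySem.Dict.empty)
  pvLoopA g (pvMassA g + 3) st.2.items 0

-- ===== PORT B =====
-- adj.setdefault(u-1, []).append(v-1) etc.: net dict effect of setdefault+append
def pvGraphB (edges : List (List Int)) : PySem.Dict Int (List Int) :=
  edges.foldl (fun g e =>
    match e with
    | [u, v] =>
      let g1 := g.insert (u - 1) (g.getD (u - 1) [] ++ [v - 1])
      g1.insert (v - 1) (g1.getD (v - 1) [] ++ [u - 1])
    | _ => g) PySem.Dict.empty

def pvMassB (g : PySem.Dict Int (List Int)) : Nat :=
  (g.items.map (fun p => p.2.length)).sum + g.items.length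

-- one round of _bfs_levels: scan the frontier, assign d+1 to new nodes
def pvRoundB (g : PySem.Dict Int (List Int)) (d : Int) (frontier : List Int)
    (lev : PySem.Dict Int Int) : PySem.Dict Int Int × List Int :=
  frontier.foldl (fun p u =>
    (g.getD u []).foldl (fun (p : PySem.Dict Int Int × List Int) w =>
      if p.1.contains w then p else (p.1.insert w (d + 1), p.2 ++ [w])) p) (lev, [])

-- the while-frontier loop of _bfs_levels (fuel 0 is never reached)
def pvLevelsGo (g : PySem.Dict Int (List Int)) :
    Nat → List Int → PySem.Dict Int Int → Int → PySem.Dict Int Int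
  | 0, _, lev, _ => lev
  | _+1, [], lev, _ => lev
  | fuel+1, frontier, lev, d =>
    let p := pvRoundB g d frontier lev
    pvLevelsGo g fuel p.2 p.1 (d + 1)

def pvLevels (g : PySem.Dict Int (List Int)) (fuel : Nat) (s : Int) : PySem.Dict Int Int :=
  pvLevelsGo g fuel [s] (PySem.Dict.empty.insert s 0) 0

-- `for u in comp: for w in adj.get(u, []): if (level[u]+level[w]) % 2 == 0: return -1`
def pvCheckB (g : PySem.Dict Int (List Int)) (lev : PySem.Dict Int Int) : List Int → Bool
  | [] => true
  | u :: rest =>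
    if (g.getD u []).any (fun w => PySem.Int.mod (lev.getD u 0 + lev.getD w 0) 2 == 0) then false
    else pvCheckB g lev rest

-- max(max(_bfs_levels(adj, v).values()) for v in comp)
def pvEccB (g : PySem.Dict Int (List Int)) (fuel : Nat) (comp : List Int) : Int :=
  (PySem.List.max?
    (comp.map (fun v => (PySem.List.max? (pvLevels g fuel v).values (fun x => x)).getD 0))
    (fun x => x)).getD 0

-- main loop over range(n) with (seen, total); -1 on a failed validity pass
def pvMainB (g : PySem.Dict Int (List Int)) (fuel : Nat) :
    List Int → PySem.Set Int → Int → Int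
  | [], _, total => total
  | s :: rest, seen, total =>
    if seen.contains s then pvMainB g fuel rest seen total
    else
      let lev := pvLevels g fuel s
      let comp := lev.keys
      let seen' := PySem.Set.update seen comp
      if pvCheckB g lev comp then
        pvMainB g fuel rest seen' (total + 1 + pvEccB g fuel comp)
      else -1

def p2493_alt (n : Int) (edges : List (List Int)) : Int :=
  let g := pvGraphB edges
  pvMainB g (pvMassB g + 3) (PySem.List.pyRange 0 n 1) PySem.Set.empty 0



-- ===== PRECONDITION & SPEC =====
-- Pre_ excludes exactly the inputs on which Python A raises: an edge row whose length is
-- not 2 makes `for u, v in edges` raise ValueError (B's unpacking raises there too).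
def Pre_p2493 (n : Int) (edges : List (List Int)) : Prop :=
  ∀ e ∈ edges, e.length = 2

instance (n : Int) (edges : List (List Int)) : Decidable (Pre_p2493 n edges) := by
  unfold Pre_p2493; infer_instance

def pvWitness_p2493 : Int × List (List Int) := (6, [[1,2],[1,4],[1,5],[2,6],[2,3],[4,6]])

def Spec_p2493 (n : Int) (edges : List (List Int)) (out : Int) : Prop := out = p2493_alt n edges
instance (n : Int) (edges : List (List Int)) (out : Int) : Decidable (Spec_p2493 n edges out) := by
  unfold Spec_p2493; infer_instance

-- ===== CLAIM (what is proved, stated in full; the proofs are below) =====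
def Claim_equal_p2493 : Prop := ∀ (n : Int) (edges : List (List Int)),
  Dom_p2493 n edges → Pre_p2493 n edges → Spec_p2493 n edges (p2493 n edges)

-- ===== LEMMAS AND PROOFS =====

-- appended after ports (test fragment)
def pvAdj (g : PySem.Dict Int (List Int)) (u : Int) : List Int := g.getD u []

def PvSym (g : PySem.Dict Int (List Int)) : Prop :=
  (∀ u w, w ∈ pvAdj g u → u ∈ pvAdj g w) ∧ (∀ u w, w ∈ pvAdj g u → g.contains w = true)

inductive PvReach (g : PySem.Dict Int (List Int)) (s : Int) : Int → Prop
  | refl : PvReach g s s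
  | step {u w : Int} : PvReach g s u → w ∈ pvAdj g u → PvReach g s w

theorem pvSym_step (g : PySem.Dict Int (List Int)) (e : List Int) (h : PvSym g) :
    PvSym (match e with
      | [u, v] =>
        let g1 := g.insert (u - 1) (g.getD (u - 1) [] ++ [v - 1])
        g1.insert (v - 1) (g1.getD (v - 1) [] ++ [u - 1])
      | _ => g) := by
  match e with
  | [] => exact h
  | [_] => exact h
  | _ :: _ :: _ :: _ => exact h
  | [u, v] =>
    obtain ⟨hs, hk⟩ := h
    constructor
    · intro x w hw
      simp only [pvAdj, PySem.Dict.getD_insert] at hw ⊢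
      by_cases hxv : x = v - 1 <;> by_cases hxu : x = u - 1 <;>
        by_cases hwv : w = v - 1 <;> by_cases hwu : w = u - 1 <;>
        simp_all [pvAdj] <;> aesop
    · intro x w hw
      simp only [pvAdj, PySem.Dict.getD_insert] at hw
      simp only [PySem.Dict.contains_insert]
      by_cases hxv : x = v - 1 <;> by_cases hxu : x = u - 1 <;> simp_all [pvAdj] <;> aesop

theorem pvGraphA_sym (edges : List (List Int)) : PvSym (pvGraphA edges) := by
  have H : ∀ (l : List (List Int)) (g : PySem.Dict Int (List Int)), PvSym g →
      PvSym (l.foldl (fun g e =>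
        match e with
        | [u, v] =>
          let g1 := g.insert (u - 1) (g.getD (u - 1) [] ++ [v - 1])
          g1.insert (v - 1) (g1.getD (v - 1) [] ++ [u - 1])
        | _ => g) g) := by
    intro l
    induction l with
    | nil => intro g h; exact h
    | cons e rest ih =>
      intro g h
      exact ih _ (pvSym_step g e h)
  have h0 : PvSym PySem.Dict.empty := by
    constructor <;> intro u w hw <;> simp [pvAdj, PySem.Dict.getD_empty] at hw
  exact H edges _ h0

theorem pvReach_trans {g : PySem.Dict Int (List Int)} {a b c : Int}
    (h1 : PvReach g a b) (h2 : PvReach g b c) : PvReach g a c := by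
  induction h2 with
  | refl => exact h1
  | step _ hadj ih => exact PvReach.step ih hadj

theorem pvReach_symm {g : PySem.Dict Int (List Int)} (hg : PvSym g) {a b : Int}
    (h : PvReach g a b) : PvReach g b a := by
  induction h with
  | refl => exact PvReach.refl
  | step _ hadj ih =>
    exact pvReach_trans (PvReach.step PvReach.refl (hg.1 _ _ hadj)) ih

-- a set closed under adjacency cannot be entered by a path from outside
theorem pvReach_not_mem_closed {g : PySem.Dict Int (List Int)} (hg : PvSym g)
    {S : List Int} (hcl : ∀ v ∈ S, ∀ w ∈ pvAdj g v, w ∈ S) {s v : Int}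
    (hs : s ∉ S) (h : PvReach g s v) : v ∉ S := by
  induction h with
  | refl => exact hs
  | step hr hadj ih =>
    intro hmem
    exact ih (hcl _ hmem _ (hg.1 _ _ hadj))

-- extension shape of a frontier scan: new keys Δ appended at level d+1, each adjacent to a
-- scanned node; old entries untouched; every node of `cov` present afterwards
def PvExt (g : PySem.Dict Int (List Int)) (d : Int) (us cov : List Int)
    (p r : PySem.Dict Int Int × List Int) : Prop :=
  ∃ Δ : List Int,
    r.1.keys = p.1.keys ++ Δ ∧ r.2 = p.2 ++ Δ ∧
    (∀ v ∈ Δ, p.1.contains v = false ∧ r.1.get? v = some (d + 1) ∧ ∃ u ∈ us, v ∈ pvAdj g u) ∧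
    (∀ v, p.1.contains v = true → r.1.get? v = p.1.get? v) ∧
    (∀ w ∈ cov, r.1.contains w = true) ∧
    (p.1.keys.Nodup → r.1.keys.Nodup)

theorem pvExt_contains_mono {p r : PySem.Dict Int Int} {Δ : List Int}
    (h : r.keys = p.keys ++ Δ) {v : Int}
    (hv : p.contains v = true) : r.contains v = true := by
  rw [PySem.Dict.contains_iff_mem_keys] at hv ⊢
  rw [h]; exact List.mem_append_left _ hv

theorem pvExt_trans {g : PySem.Dict Int (List Int)} {d : Int} {us1 us2 cov1 cov2 : List Int}
    {p q r : PySem.Dict Int Int × List Int}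
    (h1 : PvExt g d us1 cov1 p q) (h2 : PvExt g d us2 cov2 q r) :
    PvExt g d (us1 ++ us2) (cov1 ++ cov2) p r := by
  obtain ⟨Δ1, k1, a1, n1, o1, c1, nd1⟩ := h1
  obtain ⟨Δ2, k2, a2, n2, o2, c2, nd2⟩ := h2
  refine ⟨Δ1 ++ Δ2, by rw [k2, k1, List.append_assoc], by rw [a2, a1, List.append_assoc],
    ?_, ?_, ?_, fun hnd => nd2 (nd1 hnd)⟩
  · intro v hv
    rcases List.mem_append.mp hv with h | h
    · obtain ⟨hf, hg', hu⟩ := n1 v h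
      have hqc : q.1.contains v = true := by
        rw [PySem.Dict.contains_iff_mem_keys, k1]; exact List.mem_append_right _ h
      refine ⟨hf, by rw [o2 v hqc]; exact hg', ?_⟩
      obtain ⟨u, hu1, hu2⟩ := hu
      exact ⟨u, List.mem_append_left _ hu1, hu2⟩
    · obtain ⟨hf, hg', hu⟩ := n2 v h
      refine ⟨?_, hg', ?_⟩
      · by_contra hpc
        rw [pvExt_contains_mono k1 (by revert hpc; cases p.1.contains v <;> simp)] at hf
        exact absurd hf (by simp)
      · obtain ⟨u, hu1, hu2⟩ := hu
        exact ⟨u, List.mem_append_right _ hu1, hu2⟩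
  · intro v hv
    rw [o2 v (pvExt_contains_mono k1 hv)]; exact o1 v hv
  · intro w hw
    rcases List.mem_append.mp hw with h | h
    · exact pvExt_contains_mono k2 (c1 w h)
    · exact c2 w h


theorem pvExt_mono_us {g : PySem.Dict Int (List Int)} {d : Int} {us us' cov : List Int}
    {p r : PySem.Dict Int Int × List Int}
    (h : PvExt g d us cov p r) (hsub : ∀ x ∈ us, x ∈ us') : PvExt g d us' cov p r := by
  obtain ⟨Δ, k1, a1, n1, o1, c1, nd1⟩ := h
  refine ⟨Δ, k1, a1, ?_, o1, c1, nd1⟩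
  intro v hv
  obtain ⟨hf, hg', u, hu1, hu2⟩ := n1 v hv
  exact ⟨hf, hg', u, hsub u hu1, hu2⟩

theorem pvInner_ext (g : PySem.Dict Int (List Int)) (d u : Int) (ws : List Int)
    (hws : ∀ w ∈ ws, w ∈ pvAdj g u) (p : PySem.Dict Int Int × List Int) :
    PvExt g d [u] ws p
      (ws.foldl (fun (p : PySem.Dict Int Int × List Int) w =>
        if p.1.contains w then p else (p.1.insert w (d + 1), p.2 ++ [w])) p) := by
  induction ws generalizing p with
  | nil => exact ⟨[], by simp, by simp, by simp, fun _ _ => rfl, by simp, fun h => h⟩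
  | cons w ws ih =>
    have hw : w ∈ pvAdj g u := hws w (by simp)
    have hws' : ∀ x ∈ ws, x ∈ pvAdj g u := fun x hx => hws x (by simp [hx])
    simp only [List.foldl_cons]
    by_cases hc : p.1.contains w = true
    · rw [if_pos hc]
      obtain ⟨Δ, k1, a1, n1, o1, c1, nd1⟩ := ih hws' p
      refine ⟨Δ, k1, a1, n1, o1, ?_, nd1⟩
      intro x hx
      rcases List.mem_cons.mp hx with rfl | h
      · exact pvExt_contains_mono k1 hc
      · exact c1 x h
    · rw [if_neg hc]
      have hcf : p.1.contains w = false := by revert hc; cases p.1.contains w <;> simp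
      have hstep : PvExt g d [u] [w] p (p.1.insert w (d + 1), p.2 ++ [w]) := by
        refine ⟨[w], ?_, rfl, ?_, ?_, ?_, ?_⟩
        · exact PySem.Dict.keys_insert_of_not_contains _ _ hcf
        · intro v hv
          rcases List.mem_singleton.mp hv with rfl
          exact ⟨hcf, PySem.Dict.get?_insert_self _ _ _, u, by simp, hw⟩
        · intro v hv
          have hne : v ≠ w := fun h => hc (h ▸ hv)
          exact PySem.Dict.get?_insert_of_ne _ _ hne
        · intro x hx
          rcases List.mem_singleton.mp hx with rfl
          exact PySem.Dict.contains_insert_self _ _ _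
        · intro hnd
          rw [PySem.Dict.keys_insert_of_not_contains _ _ hcf]
          simp only [List.nodup_append, List.nodup_singleton]
          refine ⟨hnd, by simp, ?_⟩
          intro a ha b hb
          rcases List.mem_singleton.mp hb with rfl
          intro hab
          subst hab
          exact absurd ((PySem.Dict.contains_iff_mem_keys _ _).mpr ha) (by simp [hcf])
      have h2 := pvExt_trans hstep (ih hws' (p.1.insert w (d + 1), p.2 ++ [w]))
      exact pvExt_mono_us (by simpa using h2) (by intro x hx; simpa using hx)

theorem pvRound_ext (g : PySem.Dict Int (List Int)) (d : Int) (frontier : List Int)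
    (lev : PySem.Dict Int Int) :
    PvExt g d frontier (frontier.flatMap (pvAdj g)) (lev, ([] : List Int))
      (pvRoundB g d frontier lev) := by
  unfold pvRoundB
  suffices h : ∀ (fr : List Int) (p : PySem.Dict Int Int × List Int),
      PvExt g d fr (fr.flatMap (pvAdj g)) p
        (fr.foldl (fun p u =>
          (g.getD u []).foldl (fun (p : PySem.Dict Int Int × List Int) w =>
            if p.1.contains w then p else (p.1.insert w (d + 1), p.2 ++ [w])) p) p) by
    exact h frontier _
  intro fr
  induction fr with
  | nil => intro p; exact ⟨[], by simp, by simp, by simp, fun _ _ => rfl, by simp, fun h => h⟩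
  | cons u rest ih =>
    intro p
    simp only [List.foldl_cons]
    have h1 := pvInner_ext g d u (g.getD u []) (fun w hw => hw) p
    have h2 := ih ((g.getD u []).foldl (fun (p : PySem.Dict Int Int × List Int) w =>
        if p.1.contains w then p else (p.1.insert w (d + 1), p.2 ++ [w])) p)
    have h3 := pvExt_trans h1 h2
    simpa [pvAdj] using h3

-- loop invariant of _bfs_levels: lev holds BFS levels 0..d, frontier = the level-d nodes
structure PvInv (g : PySem.Dict Int (List Int)) (s : Int) (lev : PySem.Dict Int Int)
    (fr : List Int) (d : Int) : Prop where
  dpos : 0 ≤ d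
  nodupK : lev.keys.Nodup
  frMem : ∀ u ∈ fr, lev.get? u = some d
  frAll : ∀ u, lev.get? u = some d → u ∈ fr
  bound : ∀ v k, lev.get? v = some k → 0 ≤ k ∧ k ≤ d
  zero : ∀ v, lev.get? v = some 0 → v = s
  rootIn : lev.get? s = some 0
  parent : ∀ v k, lev.get? v = some k → k ≠ 0 → ∃ u, v ∈ pvAdj g u ∧ lev.get? u = some (k - 1)
  closure : ∀ u k, lev.get? u = some k → k < d → ∀ w ∈ pvAdj g u, ∃ j, lev.get? w = some j ∧ j ≤ k + 1
  reach : ∀ v, lev.contains v = true → PvReach g s v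

-- what survives of the invariant once the frontier is empty
structure PvLev (g : PySem.Dict Int (List Int)) (s : Int) (L : PySem.Dict Int Int) : Prop where
  nodupK : L.keys.Nodup
  rootIn : L.get? s = some 0
  zero : ∀ v, L.get? v = some 0 → v = s
  nonneg : ∀ v k, L.get? v = some k → 0 ≤ k
  parent : ∀ v k, L.get? v = some k → k ≠ 0 → ∃ u, v ∈ pvAdj g u ∧ L.get? u = some (k - 1)
  closureAll : ∀ u k, L.get? u = some k → ∀ w ∈ pvAdj g u, ∃ j, L.get? w = some j ∧ j ≤ k + 1
  reach : ∀ v, L.contains v = true → PvReach g s v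
  complete : ∀ v, PvReach g s v → L.contains v = true

theorem pvContains_get? {lev : PySem.Dict Int Int} {v : Int} (h : lev.contains v = true) :
    ∃ k, lev.get? v = some k := by
  rw [PySem.Dict.contains_eq_isSome_get?] at h
  cases hk : lev.get? v with
  | none => rw [hk] at h; simp at h
  | some k => exact ⟨k, rfl⟩

theorem pvGet?_contains {lev : PySem.Dict Int Int} {v : Int} {k : Int}
    (h : lev.get? v = some k) : lev.contains v = true := by
  rw [PySem.Dict.contains_eq_isSome_get?, h]; rfl

theorem pvInv_step {g : PySem.Dict Int (List Int)} {s : Int} {lev : PySem.Dict Int Int}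
    {fr : List Int} {d : Int} (hg : PvSym g) (inv : PvInv g s lev fr d) :
    PvInv g s (pvRoundB g d fr lev).1 (pvRoundB g d fr lev).2 (d + 1) := by
  obtain ⟨Δ, k1, a1, n1, o1, c1, nd1⟩ := pvRound_ext g d fr lev
  set r := pvRoundB g d fr lev with hr
  -- helper: classify a key of r.1
  have hclass : ∀ v k, r.1.get? v = some k →
      (lev.get? v = some k ∧ lev.contains v = true) ∨ (v ∈ Δ ∧ k = d + 1) := by
    intro v k hv
    by_cases hc : lev.contains v = true
    · left; exact ⟨by rw [← o1 v hc]; exact hv, hc⟩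
    · right
      have hmem : v ∈ r.1.keys := (PySem.Dict.contains_iff_mem_keys _ _).mp (pvGet?_contains hv)
      rw [k1] at hmem
      rcases List.mem_append.mp hmem with h | h
      · exact absurd ((PySem.Dict.contains_iff_mem_keys _ _).mpr h) hc
      · obtain ⟨_, hget, _⟩ := n1 v h
        exact ⟨h, Option.some.inj (hv.symm.trans hget)⟩
  have hold : ∀ v k, lev.get? v = some k → r.1.get? v = some k := by
    intro v k hv; rw [o1 v (pvGet?_contains hv)]; exact hv
  refine ⟨by have := inv.dpos; omega, nd1 inv.nodupK, ?_, ?_, ?_, ?_, ?_, ?_, ?_, ?_⟩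
  · -- frMem for nxt = Δ
    intro u hu
    have : r.2 = Δ := by simpa using a1
    rw [this] at hu
    exact (n1 u hu).2.1
  · -- frAll
    intro u hu
    have : r.2 = Δ := by simpa using a1
    rw [this]
    rcases hclass u (d+1) hu with ⟨hv, _⟩ | ⟨hm, _⟩
    · have := (inv.bound u (d+1) hv).2; omega
    · exact hm
  · -- bound
    intro v k hv
    rcases hclass v k hv with ⟨hv', _⟩ | ⟨_, rfl⟩
    · have := inv.bound v k hv'; omega
    · have hd := inv.dpos; omega
  · -- zero
    intro v hv
    rcases hclass v 0 hv with ⟨hv', _⟩ | ⟨_, h⟩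
    · exact inv.zero v hv'
    · exact absurd h (by have hd := inv.dpos; omega)
  · -- rootIn
    exact hold s 0 inv.rootIn
  · -- parent
    intro v k hv hk
    rcases hclass v k hv with ⟨hv', _⟩ | ⟨hm, rfl⟩
    · obtain ⟨u, hadj, hu⟩ := inv.parent v k hv' hk
      exact ⟨u, hadj, hold u _ hu⟩
    · obtain ⟨_, _, u, hu, hadj⟩ := n1 v hm
      refine ⟨u, hadj, ?_⟩
      have := inv.frMem u hu
      have h' : (d + 1 : Int) - 1 = d := by omega
      rw [h']
      exact hold u d this
  · -- closure
    intro u k hu hk w hw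
    rcases hclass u k hu with ⟨hu', hc⟩ | ⟨_, rfl⟩
    · by_cases hkd : k < d
      · obtain ⟨j, hj, hjle⟩ := inv.closure u k hu' hkd w hw
        exact ⟨j, hold w j hj, hjle⟩
      · have hkd' : k = d := by omega
        subst hkd'
        have hufr : u ∈ fr := inv.frAll u hu'
        have hwcov : w ∈ fr.flatMap (pvAdj g) := List.mem_flatMap.mpr ⟨u, hufr, hw⟩
        have hwc : r.1.contains w = true := c1 w hwcov
        obtain ⟨j, hj⟩ := pvContains_get? hwc
        rcases hclass w j hj with ⟨hj', _⟩ | ⟨_, rfl⟩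
        · exact ⟨j, hj, by have := (inv.bound w j hj').2; omega⟩
        · exact ⟨k + 1, hj, by omega⟩
    · omega
  · -- reach
    intro v hv
    obtain ⟨k, hk⟩ := pvContains_get? hv
    rcases hclass v k hk with ⟨hv', hc⟩ | ⟨hm, _⟩
    · exact inv.reach v hc
    · obtain ⟨_, _, u, hu, hadj⟩ := n1 v hm
      have hu' : lev.contains u = true := pvGet?_contains (inv.frMem u hu)
      exact PvReach.step (inv.reach u hu') hadj

theorem pvInv_final {g : PySem.Dict Int (List Int)} {s : Int} {lev : PySem.Dict Int Int}
    {d : Int} (inv : PvInv g s lev [] d) : PvLev g s lev := by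
  have hlt : ∀ v k, lev.get? v = some k → k < d := by
    intro v k hv
    have hb := inv.bound v k hv
    rcases lt_or_eq_of_le hb.2 with h | h
    · exact h
    · subst h; exact absurd (inv.frAll v hv) (by simp)
  have hcl : ∀ u k, lev.get? u = some k → ∀ w ∈ pvAdj g u, ∃ j, lev.get? w = some j ∧ j ≤ k + 1 :=
    fun u k hu w hw => inv.closure u k hu (hlt u k hu) w hw
  refine ⟨inv.nodupK, inv.rootIn, inv.zero, fun v k hv => (inv.bound v k hv).1,
    inv.parent, hcl, inv.reach, ?_⟩
  intro v hv
  induction hv with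
  | refl => exact pvGet?_contains inv.rootIn
  | step hr hadj ih =>
    obtain ⟨k, hk⟩ := pvContains_get? ih
    obtain ⟨j, hj, _⟩ := hcl _ k hk _ hadj
    exact pvGet?_contains hj

-- a level dict has at most one key per graph key, plus the root
theorem pvKeys_le {g : PySem.Dict Int (List Int)} {lev : PySem.Dict Int Int} {s : Int}
    (hk : ∀ v ∈ lev.keys, v = s ∨ g.contains v = true) (hnd : lev.keys.Nodup) :
    lev.keys.length ≤ g.items.length + 1 := by
  have h1 : lev.keys.toFinset ⊆ insert s g.keys.toFinset := by
    intro v hv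
    rcases hk v (List.mem_toFinset.mp hv) with rfl | h
    · exact Finset.mem_insert_self _ _
    · exact Finset.mem_insert_of_mem (List.mem_toFinset.mpr ((PySem.Dict.contains_iff_mem_keys _ _).mp h))
  have h2 : lev.keys.toFinset.card = lev.keys.length := List.toFinset_card_of_nodup hnd
  have h3 : g.keys.toFinset.card ≤ g.keys.length := List.toFinset_card_le _
  have h4 : g.keys.length = g.items.length := by
    show (g.items.map _).length = _
    exact List.length_map ..
  have h5 := Finset.card_le_card h1
  have h6 := Finset.card_insert_le s g.keys.toFinset
  omega

theorem pvInv_keysrange {g : PySem.Dict Int (List Int)} {s : Int} {lev : PySem.Dict Int Int}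
    {fr : List Int} {d : Int} (hg : PvSym g) (inv : PvInv g s lev fr d) :
    ∀ v ∈ lev.keys, v = s ∨ g.contains v = true := by
  intro v hv
  obtain ⟨k, hk⟩ := pvContains_get? ((PySem.Dict.contains_iff_mem_keys _ _).mpr hv)
  by_cases h0 : k = 0
  · subst h0; exact Or.inl (inv.zero v hk)
  · obtain ⟨u, hadj, _⟩ := inv.parent v k hk h0
    exact Or.inr (hg.2 u v hadj)

theorem pvInv_count {g : PySem.Dict Int (List Int)} {s : Int} {lev : PySem.Dict Int Int}
    {fr : List Int} {d : Int} (inv : PvInv g s lev fr d) (hfr : fr ≠ []) :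
    d.toNat + 1 ≤ lev.keys.length := by
  -- every value 0..d is attained
  have hstep : ∀ i : Nat, i ≤ d.toNat → ∃ v, lev.get? v = some ((d.toNat - i : Nat) : Int) := by
    intro i
    induction i with
    | zero =>
      intro _
      obtain ⟨u, hu⟩ : ∃ u, u ∈ fr := by
        cases fr with | nil => exact absurd rfl hfr | cons a l => exact ⟨a, by simp⟩
      refine ⟨u, ?_⟩
      have := inv.frMem u hu
      have hd : ((d.toNat - 0 : Nat) : Int) = d := by have := inv.dpos; omega
      rw [hd]; exact this
    | succ i ih =>
      intro hi
      obtain ⟨v, hv⟩ := ih (by omega)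
      have hne : ((d.toNat - i : Nat) : Int) ≠ 0 := by omega
      obtain ⟨u, _, hu⟩ := inv.parent v _ hv hne
      refine ⟨u, ?_⟩
      have : ((d.toNat - i : Nat) : Int) - 1 = ((d.toNat - (i+1) : Nat) : Int) := by omega
      rw [this] at hu; exact hu
  have hall : ∀ j : Nat, j ≤ d.toNat → ∃ v, lev.get? v = some (j : Int) := by
    intro j hj
    obtain ⟨v, hv⟩ := hstep (d.toNat - j) (by omega)
    have : ((d.toNat - (d.toNat - j) : Nat) : Int) = (j : Int) := by omega
    rw [this] at hv; exact ⟨v, hv⟩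
  classical
  let f : Nat → Int := fun j => if h : j ≤ d.toNat then (hall j h).choose else 0
  have hcard := Finset.card_le_card_of_injOn f
    (s := Finset.range (d.toNat + 1)) (t := lev.keys.toFinset)
    (by
      intro j hj
      rw [Finset.mem_coe, Finset.mem_range] at hj
      have hj' : j ≤ d.toNat := by omega
      have hspec := (hall j hj').choose_spec
      simp only [f, dif_pos hj']
      exact List.mem_toFinset.mpr ((PySem.Dict.contains_iff_mem_keys _ _).mp (pvGet?_contains hspec)))
    (by
      intro a ha b hb hab
      simp only [Finset.mem_coe, Finset.mem_range] at ha hb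
      have ha' : a ≤ d.toNat := by omega
      have hb' : b ≤ d.toNat := by omega
      have hsa := (hall a ha').choose_spec
      have hsb := (hall b hb').choose_spec
      simp only [f, dif_pos ha', dif_pos hb'] at hab
      rw [hab] at hsa
      rw [hsb] at hsa
      have := Option.some.inj hsa
      exact_mod_cast this.symm)
  have h2 : lev.keys.toFinset.card ≤ lev.keys.length := List.toFinset_card_le _
  simp only [Finset.card_range] at hcard
  omega

theorem pvLevelsGo_spec {g : PySem.Dict Int (List Int)} {s : Int} (hg : PvSym g) :
    ∀ (F : Nat) (fr : List Int) (lev : PySem.Dict Int Int) (d : Int),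
      PvInv g s lev fr d →
      (g.items.map (fun p => p.2.length)).sum + g.items.length + 3 ≤ F + d.toNat →
      PvLev g s (pvLevelsGo g F fr lev d) := by
  intro F
  induction F with
  | zero =>
    intro fr lev d inv hF
    have hfr : fr = [] := by
      by_contra hfr
      have h1 := pvInv_count inv hfr
      have h2 := pvKeys_le (pvInv_keysrange hg inv) inv.nodupK
      omega
    subst hfr
    exact pvInv_final inv
  | succ F ih =>
    intro fr lev d inv hF
    cases fr with
    | nil => exact pvInv_final inv
    | cons u fr' =>
      show PvLev g s (pvLevelsGo g F (pvRoundB g d (u :: fr') lev).2 (pvRoundB g d (u :: fr') lev).1 (d + 1))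
      refine ih _ _ _ (pvInv_step hg inv) ?_
      have := inv.dpos
      have : (d + 1).toNat = d.toNat + 1 := by omega
      omega

theorem pvInv_init (g : PySem.Dict Int (List Int)) (s : Int) :
    PvInv g s (PySem.Dict.empty.insert s 0) [s] 0 := by
  have hget : ∀ v : Int, (PySem.Dict.empty.insert s (0:Int)).get? v = if v = s then some 0 else none := by
    intro v
    rw [PySem.Dict.get?_insert]
    split <;> simp [PySem.Dict.get?_empty]
  refine ⟨le_refl 0, ?_, ?_, ?_, ?_, ?_, ?_, ?_, ?_, ?_⟩
  · rw [PySem.Dict.keys_insert_of_not_contains _ _ (PySem.Dict.contains_empty s)]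
    simp [PySem.Dict.keys_empty]
  · intro u hu; rcases List.mem_singleton.mp hu with rfl; rw [hget]; simp
  · intro u hu; rw [hget] at hu; by_cases h : u = s
    · simp [h]
    · rw [if_neg h] at hu; exact absurd hu (by simp)
  · intro v k hv; rw [hget] at hv; split at hv
    · injection hv with h; omega
    · exact absurd hv (by simp)
  · intro v hv; rw [hget] at hv; split at hv
    · assumption
    · exact absurd hv (by simp)
  · rw [hget]; simp
  · intro v k hv hk; rw [hget] at hv; split at hv
    · injection hv with h; omega
    · exact absurd hv (by simp)
  · intro u k hu hk w hw; rw [hget] at hu; split at hu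
    · injection hu with h; omega
    · exact absurd hu (by simp)
  · intro v hv
    obtain ⟨k, hk⟩ := pvContains_get? hv
    rw [hget] at hk; split at hk
    · subst ‹v = s›; exact PvReach.refl
    · exact absurd hk (by simp)

theorem pvLevels_props (g : PySem.Dict Int (List Int)) (hg : PvSym g) (s : Int) :
    PvLev g s (pvLevels g (pvMassA g + 3) s) := by
  unfold pvLevels
  refine pvLevelsGo_spec hg _ _ _ _ (pvInv_init g s) ?_
  unfold pvMassA
  omega

theorem pvInsert_nodupKeys {ν : Type} {g : PySem.Dict Int ν} (k : Int) (v : ν)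
    (h : g.keys.Nodup) : (g.insert k v).keys.Nodup := by
  by_cases hc : g.contains k = true
  · rw [PySem.Dict.keys_insert_of_contains _ _ hc]; exact h
  · have hcf : g.contains k = false := by revert hc; cases g.contains k <;> simp
    rw [PySem.Dict.keys_insert_of_not_contains _ _ hcf]
    simp only [List.nodup_append, List.nodup_singleton]
    refine ⟨h, by simp, ?_⟩
    intro a ha b hb
    rcases List.mem_singleton.mp hb with rfl
    intro hab; subst hab
    exact absurd ((PySem.Dict.contains_iff_mem_keys _ _).mpr ha) (by simp [hcf])

theorem pvGraphA_nodupKeys (edges : List (List Int)) : (pvGraphA edges).keys.Nodup := by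
  have H : ∀ (l : List (List Int)) (g : PySem.Dict Int (List Int)), g.keys.Nodup →
      (l.foldl (fun g e =>
        match e with
        | [u, v] =>
          let g1 := g.insert (u - 1) (g.getD (u - 1) [] ++ [v - 1])
          g1.insert (v - 1) (g1.getD (v - 1) [] ++ [u - 1])
        | _ => g) g).keys.Nodup := by
    intro l
    induction l with
    | nil => intro g h; exact h
    | cons e rest ih =>
      intro g h
      refine ih _ ?_
      match e with
      | [] => exact h
      | [_] => exact h
      | _ :: _ :: _ :: _ => exact h
      | [u, v] => exact pvInsert_nodupKeys _ _ (pvInsert_nodupKeys _ _ h)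
  exact H edges _ (by simp [PySem.Dict.nodup_keys_empty])

theorem pvSum_map_succ (l : List Int) (f : Int → Nat) :
    (l.map (fun v => f v + 1)).sum = (l.map f).sum + l.length := by
  induction l with
  | nil => simp
  | cons a l ih => simp [ih]; omega

theorem pvSum_filter_update (l : List Int) (f : Int → Nat) (p p' : Int → Bool) (v : Int)
    (hnd : l.Nodup) (hv : v ∈ l) (hp : p v = true) (hp' : p' v = false)
    (hagree : ∀ x, x ≠ v → p' x = p x) :
    ((l.filter p').map f).sum + f v = ((l.filter p).map f).sum := by
  induction l with
  | nil => simp at hv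
  | cons a l ih =>
    rcases List.mem_cons.mp hv with rfl | hmem
    · have hvl : v ∉ l := (List.nodup_cons.mp hnd).1
      have : l.filter p' = l.filter p := by
        apply List.filter_congr
        intro x hx
        exact hagree x (fun h => hvl (h ▸ hx))
      simp [List.filter_cons, hp, hp', this]
      omega
    · have hav : a ≠ v := by rintro rfl; exact (List.nodup_cons.mp hnd).1 hmem
      have h2 := ih (List.nodup_cons.mp hnd).2 hmem
      simp only [List.filter_cons, hagree a hav]
      cases hpa : p a <;> simp [hpa, h2] <;> omega

theorem pvSum_deg_le (g : PySem.Dict Int (List Int)) (hgnd : g.keys.Nodup)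
    (K : List Int) (hnd : K.Nodup) :
    (K.map (fun v => (pvAdj g v).length)).sum ≤ (g.items.map (fun p => p.2.length)).sum := by
  classical
  have hfin1 : (K.map (fun v => (pvAdj g v).length)).sum
      = ∑ v ∈ K.toFinset, (pvAdj g v).length := by
    rw [List.sum_toFinset _ hnd]
  have hzero : ∀ v, v ∉ g.keys.toFinset → (pvAdj g v).length = 0 := by
    intro v hv
    have hcf : g.contains v = false := by
      cases hgc : g.contains v
      · rfl
      · exact absurd (List.mem_toFinset.mpr ((PySem.Dict.contains_iff_mem_keys _ _).mp hgc)) hv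
    simp [pvAdj, PySem.Dict.getD_of_not_contains _ _ hcf]
  have hsub : (K.toFinset ∩ g.keys.toFinset) ⊆ K.toFinset := Finset.inter_subset_left
  have heq : ∑ v ∈ K.toFinset, (pvAdj g v).length
      = ∑ v ∈ K.toFinset ∩ g.keys.toFinset, (pvAdj g v).length := by
    refine (Finset.sum_subset hsub ?_).symm
    intro x hx hnx
    refine hzero x ?_
    intro hxg
    exact hnx (Finset.mem_inter.mpr ⟨hx, hxg⟩)
  have hle : ∑ v ∈ K.toFinset ∩ g.keys.toFinset, (pvAdj g v).length
      ≤ ∑ v ∈ g.keys.toFinset, (pvAdj g v).length :=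
    Finset.sum_le_sum_of_subset Finset.inter_subset_right
  have hfin2 : ∑ v ∈ g.keys.toFinset, (pvAdj g v).length
      = (g.keys.map (fun v => (pvAdj g v).length)).sum := by
    rw [List.sum_toFinset _ hgnd]
  have hitems : g.items.map (fun p => p.2.length) = g.keys.map (fun v => (pvAdj g v).length) := by
    rw [PySem.Dict.items_eq_map_keys g hgnd []]
    simp only [List.map_map]
    apply List.map_congr_left
    intro k hk
    simp [pvAdj, Function.comp]
  rw [hitems]
  omega

-- parity soundness: a 2-colouring of the component certifies bipartiteness
def PvBip (g : PySem.Dict Int (List Int)) (r : Int) : Prop :=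
  ∃ cB : Int → Bool, ∀ u, PvReach g r u → ∀ w ∈ pvAdj g u, cB u ≠ cB w

-- levels of adjacent reachable nodes have odd sum (no equal-parity edge)
def PvNoConf (g : PySem.Dict Int (List Int)) (L : PySem.Dict Int Int) : Prop :=
  ∀ u w ku kw, L.get? u = some ku → w ∈ pvAdj g u → L.get? w = some kw → (ku + kw) % 2 = 1

theorem pvScanA_pass (col : PySem.Dict Int Int) (c : Int) (ws : List Int)
    (hpass : ∀ w ∈ ws, ∀ cw, col.get? w = some cw → (cw - c - 1) % 2 ≠ 1) :
    ∀ q, pvScanA col c ws q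
      = some (q ++ (ws.filter (fun w => !col.contains w)).map (fun w => (w, c + 1))) := by
  induction ws with
  | nil => intro q; simp [pvScanA]
  | cons w ws ih =>
    intro q
    have hpass' : ∀ x ∈ ws, ∀ cw, col.get? x = some cw → (cw - c - 1) % 2 ≠ 1 :=
      fun x hx => hpass x (List.mem_cons_of_mem _ hx)
    show pvScanA col c (w :: ws) q = _
    rw [pvScanA]
    by_cases hc : col.contains w = true
    · obtain ⟨cw, hcw⟩ := pvContains_get? hc
      have hgd : col.getD w 0 = cw := by
        rw [PySem.Dict.getD_eq_get?_getD, hcw]; rfl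
      have hmod : PySem.Int.mod (col.getD w 0 - c - 1) 2 = (cw - c - 1) % 2 := by
        rw [hgd, PySem.Int.mod_eq_emod_of_pos (by norm_num)]
      rw [if_neg (by
        simp only [hc, Bool.true_and, hmod]
        simpa using hpass w (by simp) cw hcw)]
      rw [if_pos hc, ih hpass' q]
      simp [List.filter_cons, hc]
    · have hcf : col.contains w = false := by revert hc; cases col.contains w <;> simp
      rw [if_neg (by simp [hcf]), if_neg (by simp [hcf]), ih hpass' (q ++ [(w, c + 1)])]
      simp [List.filter_cons, hcf]

theorem pvScanA_some (col : PySem.Dict Int Int) (c : Int) :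
    ∀ (ws : List Int) (q q' : List (Int × Int)), pvScanA col c ws q = some q' →
      q' = q ++ (ws.filter (fun w => !col.contains w)).map (fun w => (w, c + 1)) ∧
      (∀ w ∈ ws, ∀ cw, col.get? w = some cw → (cw - c - 1) % 2 ≠ 1) := by
  intro ws
  induction ws with
  | nil =>
    intro q q' h
    simp [pvScanA] at h
    exact ⟨by simp [h.symm], by simp⟩
  | cons w ws ih =>
    intro q q' h
    rw [pvScanA] at h
    split at h
    · exact absurd h (by simp)
    · rename_i hcond
      by_cases hc : col.contains w = true
      · obtain ⟨cw, hcw⟩ := pvContains_get? hc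
        have hgd : col.getD w 0 = cw := by
          rw [PySem.Dict.getD_eq_get?_getD, hcw]; rfl
        have hpw : (cw - c - 1) % 2 ≠ 1 := by
          intro hbad
          apply hcond
          simp only [hc, Bool.true_and, hgd]
          rw [PySem.Int.mod_eq_emod_of_pos (by norm_num)]
          simpa using hbad
        rw [if_pos hc] at h
        obtain ⟨h1, h2⟩ := ih q q' h
        refine ⟨by simpa [List.filter_cons, hc] using h1, ?_⟩
        intro x hx cx hcx
        rcases List.mem_cons.mp hx with rfl | hmem
        · rw [hcx] at hcw; rw [Option.some.inj hcw]; exact hpw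
        · exact h2 x hmem cx hcx
      · have hcf : col.contains w = false := by revert hc; cases col.contains w <;> simp
        rw [if_neg (by simp [hcf])] at h
        obtain ⟨h1, h2⟩ := ih _ q' h
        refine ⟨by simpa [List.filter_cons, hcf] using h1, ?_⟩
        intro x hx cx hcx
        rcases List.mem_cons.mp hx with rfl | hmem
        · exact absurd (pvGet?_contains hcx) (by simp [hcf])
        · exact h2 x hmem cx hcx

-- loop invariant of A's bfs_coloring in the conflict-free case, w.r.t. the level dict L
structure PvBInv (g : PySem.Dict Int (List Int)) (L : PySem.Dict Int Int)
    (q : List (Int × Int)) (col : PySem.Dict Int Int) : Prop where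
  colSound : ∀ v c, col.get? v = some c → L.get? v = some c
  qSound : ∀ e ∈ q, L.get? e.1 = some e.2
  shape : ∃ (dq : Int) (q1 q2 : List (Int × Int)), q = q1 ++ q2 ∧ (∀ e ∈ q1, e.2 = dq) ∧
      (∀ e ∈ q2, e.2 = dq + 1) ∧
      (∀ v k, L.get? v = some k → col.contains v = false → dq ≤ k)
  cover : ∀ v k, L.get? v = some k → col.contains v = false →
      (v, k) ∈ q ∨ ∃ u, v ∈ pvAdj g u ∧ L.get? u = some (k - 1) ∧ col.contains u = false
  nodupK : col.keys.Nodup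

def pvBM (g : PySem.Dict Int (List Int)) (L col : PySem.Dict Int Int)
    (q : List (Int × Int)) : Nat :=
  q.length + ((L.keys.filter (fun v => !col.contains v)).map (fun v => (pvAdj g v).length + 1)).sum

theorem pvShape_norm {g : PySem.Dict Int (List Int)} {L : PySem.Dict Int Int}
    {v c : Int} {q : List (Int × Int)} {col : PySem.Dict Int Int}
    (inv : PvBInv g L ((v, c) :: q) col) :
    ∃ q1 q2, q = q1 ++ q2 ∧ (∀ e ∈ q1, e.2 = c) ∧ (∀ e ∈ q2, e.2 = c + 1) ∧
      (∀ x k, L.get? x = some k → col.contains x = false → c ≤ k) := by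
  obtain ⟨dq, q1, q2, hsplit, h1, h2, hmin⟩ := inv.shape
  cases q1 with
  | cons e q1' =>
    rw [List.cons_append] at hsplit
    injection hsplit with he ht
    have hc : c = dq := by rw [← he] at h1; exact (h1 (v, c) (by simp)).symm ▸ rfl
    subst hc
    exact ⟨q1', q2, ht, fun e he' => h1 e (by rw [← he]; exact List.mem_cons_of_mem _ he'),
      h2, hmin⟩
  | nil =>
    simp only [List.nil_append] at hsplit
    have hc : c = dq + 1 := by
      have : ((v, c) : Int × Int) ∈ q2 := by rw [← hsplit]; simp
      exact h2 _ this
    have hnone : ∀ x k, L.get? x = some k → col.contains x = false → k ≠ dq := by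
      intro x k hx hxc hk
      subst hk
      rcases inv.cover x k hx hxc with hmem | ⟨u, _, hu, huc⟩
      · rw [hsplit] at hmem
        have h : k = k + 1 := h2 _ hmem
        omega
      · have := hmin u (k - 1) hu huc
        omega
    refine ⟨q, [], by simp, ?_, by simp, ?_⟩
    · intro e he'
      have : e ∈ q2 := by rw [← hsplit]; exact List.mem_cons_of_mem _ he'
      rw [h2 _ this, hc]
    · intro x k hx hxc
      have := hmin x k hx hxc
      have := hnone x k hx hxc
      omega

theorem pvBfsA_success {g : PySem.Dict Int (List Int)} {r : Int} {L : PySem.Dict Int Int}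
    (hg : PvSym g) (P : PvLev g r L) (hnc : PvNoConf g L) :
    ∀ (F : Nat) (q : List (Int × Int)) (col : PySem.Dict Int Int),
      PvBInv g L q col → pvBM g L col q < F →
      ∃ col', pvBfsA g F q col = some col' ∧ (∀ v, col'.get? v = L.get? v) ∧
        col'.keys.Nodup := by
  intro F
  induction F with
  | zero => intro q col _ hM; omega
  | succ F ih =>
    intro q col inv hM
    cases q with
    | nil =>
      refine ⟨col, rfl, ?_, inv.nodupK⟩
      -- every node of L is coloured (downward induction on the level)
      have hallcol : ∀ n : Nat, ∀ v k, L.get? v = some k → k.toNat = n → col.contains v = true := by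
        intro n
        induction n using Nat.strong_induction_on with
        | _ n ihn =>
          intro v k hv hk
          by_contra hvc
          have hvc' : col.contains v = false := by revert hvc; cases col.contains v <;> simp
          rcases inv.cover v k hv hvc' with hmem | ⟨u, _, hu, huc⟩
          · simp at hmem
          · have hk0 : 0 ≤ k - 1 := P.nonneg u _ hu
            have hkpos : 0 < k := by omega
            exact absurd (ihn (k - 1).toNat (by omega) u (k - 1) hu rfl)
              (by rw [huc]; simp)
      intro v
      cases hLv : L.get? v with
      | some k =>
        have hcv := hallcol k.toNat v k hLv rfl
        obtain ⟨cv, hcv'⟩ := pvContains_get? hcv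
        rw [hcv']
        rw [inv.colSound v cv hcv'] at hLv
        exact hLv.symm ▸ rfl
      | none =>
        cases hcv : col.get? v with
        | none => rfl
        | some cv => rw [inv.colSound v cv hcv] at hLv; exact absurd hLv (by simp)
    | cons e q' =>
      obtain ⟨v, c⟩ := e
      by_cases hc : col.contains v = true
      · -- duplicate entry: skip
        rw [show pvBfsA g (F+1) ((v,c) :: q') col = pvBfsA g F q' col by rw [pvBfsA, if_pos hc]]
        obtain ⟨q1, q2, hsplit, h1, h2, hmin⟩ := pvShape_norm inv
        refine ih q' col ⟨inv.colSound, fun e he => inv.qSound e (List.mem_cons_of_mem _ he),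
          ⟨c, q1, q2, hsplit, h1, h2, hmin⟩, ?_, inv.nodupK⟩ ?_
        · intro x k hx hxc
          rcases inv.cover x k hx hxc with hmem | hpar
          · rcases List.mem_cons.mp hmem with heq | hmem'
            · exfalso
              have : x = v := congrArg Prod.fst heq
              subst this
              rw [hc] at hxc; exact absurd hxc (by simp)
            · exact Or.inl hmem'
          · exact Or.inr hpar
        · unfold pvBM at hM ⊢
          simp only [List.length_cons] at hM
          omega
      · -- fresh node: colour it and scan its neighbours
        have hcf : col.contains v = false := by revert hc; cases col.contains v <;> simp
        have hLv : L.get? v = some c := inv.qSound (v, c) (by simp)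
        obtain ⟨q1, q2, hsplit, h1, h2, hmin⟩ := pvShape_norm inv
        set col₁ := col.insert v c with hcol₁
        have hcolS₁ : ∀ w cw, col₁.get? w = some cw → L.get? w = some cw := by
          intro w cw hw
          rw [PySem.Dict.get?_insert] at hw
          split at hw
          · subst ‹w = v›; rw [← Option.some.inj hw]; exact hLv
          · exact inv.colSound w cw hw
        have hpass : ∀ w ∈ pvAdj g v, ∀ cw, col₁.get? w = some cw → (cw - c - 1) % 2 ≠ 1 := by
          intro w hw cw hcw
          have hLw : L.get? w = some cw := hcolS₁ w cw hcw
          have := hnc v w c cw hLv hw hLw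
          omega
        have hscan := pvScanA_pass col₁ c (pvAdj g v) hpass q'
        set news := ((pvAdj g v).filter (fun w => !col₁.contains w)).map (fun w => (w, c + 1))
          with hnews
        have hstep : pvBfsA g (F+1) ((v,c) :: q') col = pvBfsA g F (q' ++ news) col₁ := by
          rw [pvBfsA, if_neg (by simp [hcf])]
          show (match pvScanA (col.insert v c) c (g.getD v []) q' with
            | none => none
            | some q'' => pvBfsA g F q'' (col.insert v c)) = _
          rw [show g.getD v [] = pvAdj g v from rfl, hscan]
        rw [hstep]
        -- re-establish the invariant
        have hmono₁ : ∀ x, col.contains x = true → col₁.contains x = true := by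
          intro x hx
          rw [PySem.Dict.contains_insert]
          simp [hx]
        have hanti₁ : ∀ x, col₁.contains x = false → col.contains x = false := by
          intro x hx
          cases hcx : col.contains x
          · rfl
          · rw [hmono₁ x hcx] at hx; exact absurd hx (by simp)
        have hne₁ : ∀ x, col₁.contains x = false → x ≠ v := by
          intro x hx heq
          subst heq
          rw [PySem.Dict.contains_insert_self] at hx
          exact absurd hx (by simp)
        have hnewsSound : ∀ e ∈ news, L.get? e.1 = some e.2 := by
          intro e he
          simp only [hnews, List.mem_map, List.mem_filter] at he
          obtain ⟨w, ⟨hwadj, hwc⟩, rfl⟩ := he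
          have hwc' : col₁.contains w = false := by revert hwc; cases col₁.contains w <;> simp
          obtain ⟨j, hj, hjle⟩ := P.closureAll v c hLv w hwadj
          have hvadj : v ∈ pvAdj g w := hg.1 v w hwadj
          obtain ⟨c', hc', hc'le⟩ := P.closureAll w j hj v hvadj
          rw [hLv] at hc'
          have hcc : c' = c := (Option.some.inj hc').symm
          have hodd := hnc v w c j hLv hwadj hj
          have hge := hmin w j hj (hanti₁ w hwc')
          have : j = c + 1 := by omega
          subst this
          exact hj
        refine ih (q' ++ news) col₁ ⟨hcolS₁, ?_, ?_, ?_, ?_⟩ ?_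
        · intro e he
          rcases List.mem_append.mp he with h | h
          · exact inv.qSound e (List.mem_cons_of_mem _ h)
          · exact hnewsSound e h
        · refine ⟨c, q1, q2 ++ news, by rw [hsplit, List.append_assoc], h1, ?_, ?_⟩
          · intro e he
            rcases List.mem_append.mp he with h | h
            · exact h2 e h
            · simp only [hnews, List.mem_map, List.mem_filter] at h
              obtain ⟨w, _, rfl⟩ := h
              rfl
          · intro x k hx hxc
            exact hmin x k hx (hanti₁ x hxc)
        · -- cover
          intro x k hx hxc
          have hxcol : col.contains x = false := hanti₁ x hxc
          rcases inv.cover x k hx hxcol with hmem | ⟨u, hadj, hu, huc⟩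
          · rcases List.mem_cons.mp hmem with heq | hmem'
            · exfalso
              have hxv : x = v := congrArg Prod.fst heq
              exact hne₁ x hxc hxv
            · exact Or.inl (List.mem_append_left _ hmem')
          · by_cases huv : u = v
            · subst huv
              rw [hLv] at hu
              have hkc : c = k - 1 := Option.some.inj hu
              left
              refine List.mem_append_right _ ?_
              simp only [hnews, List.mem_map, List.mem_filter]
              exact ⟨x, ⟨hadj, by simp [hxc]⟩, by rw [show c + 1 = k by omega]⟩
            · right
              refine ⟨u, hadj, hu, ?_⟩
              rw [PySem.Dict.contains_insert]
              simp [huc, huv]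
        · exact pvInsert_nodupKeys v c inv.nodupK
        · -- measure decreases by at least 2
          have hvmem : v ∈ L.keys := (PySem.Dict.contains_iff_mem_keys _ _).mp (pvGet?_contains hLv)
          have hupd := pvSum_filter_update L.keys (fun v => (pvAdj g v).length + 1)
            (fun x => !col.contains x) (fun x => !col₁.contains x) v P.nodupK hvmem
            (by simp [hcf]) (by simp [hcol₁, PySem.Dict.contains_insert_self])
            (by
              intro x hxv
              show (!col₁.contains x) = (!col.contains x)
              rw [hcol₁, PySem.Dict.contains_insert]
              simp [hxv])
          have hupd' : ((L.keys.filter (fun x => !col₁.contains x)).map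
              (fun v => (pvAdj g v).length + 1)).sum + ((pvAdj g v).length + 1)
              = ((L.keys.filter (fun x => !col.contains x)).map
                (fun v => (pvAdj g v).length + 1)).sum := hupd
          have hlen : news.length ≤ (pvAdj g v).length := by
            rw [hnews, List.length_map]
            exact List.length_filter_le _ _
          unfold pvBM at hM ⊢
          simp only [List.length_cons, List.length_append] at hM ⊢
          omega

theorem pvBfsA_some_facts {g : PySem.Dict Int (List Int)} (hg : PvSym g) :
    ∀ (F : Nat) (q : List (Int × Int)) (col col' : PySem.Dict Int Int),
      pvBfsA g F q col = some col' →
      (∀ v c, col.get? v = some c → col'.get? v = some c) ∧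
      (∀ e ∈ q, col'.contains e.1 = true) ∧
      (∀ v, col'.contains v = true → col.contains v = false →
        ∀ w ∈ pvAdj g v, col'.contains w = true) ∧
      ((∀ u x cu cx, col.get? u = some cu → x ∈ pvAdj g u → col.get? x = some cx →
          (cu + cx) % 2 = 1) →
        ∀ u x cu cx, col'.get? u = some cu → x ∈ pvAdj g u → col'.get? x = some cx →
          (cu + cx) % 2 = 1) := by
  intro F
  induction F with
  | zero => intro q col col' h; exact absurd h (by simp [pvBfsA])
  | succ F ih =>
    intro q col col' h
    cases q with
    | nil =>
      have hcc : col = col' := Option.some.inj h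
      subst hcc
      refine ⟨fun v c hv => hv, by simp, ?_, fun hpp => hpp⟩
      intro v hv hv' w hw
      rw [hv] at hv'; exact absurd hv' (by simp)
    | cons e q' =>
      obtain ⟨v, c⟩ := e
      by_cases hc : col.contains v = true
      · rw [show pvBfsA g (F+1) ((v,c) :: q') col = pvBfsA g F q' col by
          rw [pvBfsA, if_pos hc]] at h
        obtain ⟨hmono, habs, hexp, hpp⟩ := ih q' col col' h
        refine ⟨hmono, ?_, hexp, hpp⟩
        intro e he
        rcases List.mem_cons.mp he with rfl | he'
        · obtain ⟨cv, hcv⟩ := pvContains_get? hc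
          exact pvGet?_contains (hmono _ _ hcv)
        · exact habs e he'
      · have hcf : col.contains v = false := by revert hc; cases col.contains v <;> simp
        rw [pvBfsA, if_neg (by simp [hcf])] at h
        have h' : (match pvScanA (col.insert v c) c (g.getD v []) q' with
            | none => none
            | some q'' => pvBfsA g F q'' (col.insert v c)) = some col' := h
        clear h
        set col₁ := col.insert v c with hcol₁
        cases hscan : pvScanA col₁ c (g.getD v []) q' with
        | none =>
          rw [hscan] at h'
          exact absurd h' (by simp)
        | some q'' =>
          rw [hscan] at h'
          have h : pvBfsA g F q'' col₁ = some col' := h'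
          obtain ⟨hq'', hpassed⟩ := pvScanA_some col₁ c (g.getD v []) q' q'' hscan
          obtain ⟨hmono₁, habs₁, hexp₁, hpp₁⟩ := ih q'' col₁ col' h
          have hmono : ∀ x cx, col.get? x = some cx → col'.get? x = some cx := by
            intro x cx hx
            have hxv : x ≠ v := by
              intro heq; subst heq
              rw [(PySem.Dict.get?_eq_none_iff_contains _ _).mpr hcf] at hx
              exact absurd hx (by simp)
            exact hmono₁ x cx (by rw [hcol₁, PySem.Dict.get?_insert_of_ne _ _ hxv]; exact hx)
          have hvin : col'.get? v = some c :=
            hmono₁ v c (by rw [hcol₁]; exact PySem.Dict.get?_insert_self _ _ _)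
          refine ⟨hmono, ?_, ?_, ?_⟩
          · intro e he
            rcases List.mem_cons.mp he with rfl | he'
            · exact pvGet?_contains hvin
            · exact habs₁ e (by rw [hq'']; exact List.mem_append_left _ he')
          · intro x hx hxcol w hw
            by_cases hxv : x = v
            · subst hxv
              by_cases hwc : col₁.contains w = true
              · obtain ⟨cw, hcw⟩ := pvContains_get? hwc
                exact pvGet?_contains (hmono₁ w cw hcw)
              · have hwcf : col₁.contains w = false := by
                  revert hwc; cases col₁.contains w <;> simp
                refine habs₁ (w, c + 1) ?_
                rw [hq'']
                refine List.mem_append_right _ ?_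
                simp only [List.mem_map, List.mem_filter]
                exact ⟨w, ⟨hw, by simp [hwcf]⟩, rfl⟩
            · refine hexp₁ x hx ?_ w hw
              rw [hcol₁, PySem.Dict.contains_insert]
              simp [hxcol, hxv]
          · intro hpp0
            refine hpp₁ ?_
            intro u x cu cx hu hadj hx
            rw [hcol₁, PySem.Dict.get?_insert] at hu hx
            by_cases huv : u = v <;> by_cases hxv : x = v
            · subst huv; subst hxv
              rw [if_pos rfl] at hu hx
              have hcu := Option.some.inj hu
              have hcx := Option.some.inj hx
              have hp := hpassed x hadj c
                (by rw [hcol₁]; exact PySem.Dict.get?_insert_self _ _ _)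
              omega
            · subst huv
              rw [if_pos rfl] at hu
              rw [if_neg hxv] at hx
              have hcu := Option.some.inj hu
              have hp := hpassed x hadj cx
                (by rw [hcol₁, PySem.Dict.get?_insert_of_ne _ _ hxv]; exact hx)
              omega
            · subst hxv
              rw [if_pos rfl] at hx
              rw [if_neg huv] at hu
              have hcx := Option.some.inj hx
              have hu' : u ∈ pvAdj g x := hg.1 u x hadj
              have hp := hpassed u hu' cu
                (by rw [hcol₁, PySem.Dict.get?_insert_of_ne _ _ huv]; exact hu)
              omega
            · rw [if_neg huv] at hu
              rw [if_neg hxv] at hx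
              exact hpp0 u x cu cx hu hadj hx

theorem pvBfsA_proper_of_some {g : PySem.Dict Int (List Int)} {F : Nat}
    {col' : PySem.Dict Int Int} (hg : PvSym g) (r : Int)
    (h : pvBfsA g F [(r, 0)] PySem.Dict.empty = some col') :
    (∀ v, PvReach g r v → col'.contains v = true) ∧
    (∀ u x cu cx, col'.get? u = some cu → x ∈ pvAdj g u → col'.get? x = some cx →
      (cu + cx) % 2 = 1) := by
  obtain ⟨hmono, habs, hexp, hpp⟩ := pvBfsA_some_facts hg F _ _ _ h
  have hcomp : ∀ v, PvReach g r v → col'.contains v = true := by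
    intro v hv
    induction hv with
    | refl => exact habs (r, 0) (by simp)
    | step hr hadj ihr => exact hexp _ ihr (PySem.Dict.contains_empty _) _ hadj
  refine ⟨hcomp, hpp ?_⟩
  intro u x cu cx hu
  rw [PySem.Dict.get?_empty] at hu
  exact absurd hu (by simp)

theorem pvBip_of_some {g : PySem.Dict Int (List Int)} {F : Nat}
    {col' : PySem.Dict Int Int} (hg : PvSym g) (r : Int)
    (h : pvBfsA g F [(r, 0)] PySem.Dict.empty = some col') : PvBip g r := by
  obtain ⟨hcomp, hprop⟩ := pvBfsA_proper_of_some hg r h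
  refine ⟨fun v => decide ((col'.getD v 0) % 2 = 1), ?_⟩
  intro u hu w hw
  obtain ⟨cu, hcu⟩ := pvContains_get? (hcomp u hu)
  obtain ⟨cw, hcw⟩ := pvContains_get? (hcomp w (PvReach.step hu hw))
  have hodd := hprop u w cu cw hcu hw hcw
  have hgu : col'.getD u 0 = cu := by rw [PySem.Dict.getD_eq_get?_getD, hcu]; rfl
  have hgw : col'.getD w 0 = cw := by rw [PySem.Dict.getD_eq_get?_getD, hcw]; rfl
  show decide (col'.getD u 0 % 2 = 1) ≠ decide (col'.getD w 0 % 2 = 1)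
  rw [hgu, hgw]
  intro heq
  rw [decide_eq_decide] at heq
  omega

theorem pvBip_noconf {g : PySem.Dict Int (List Int)} {r : Int} {L : PySem.Dict Int Int}
    (hg : PvSym g) (P : PvLev g r L) : PvBip g r → PvNoConf g L := by
  rintro ⟨cB, hcB⟩
  have hpar : ∀ n : Nat, ∀ v k, L.get? v = some k → k.toNat = n → (k % 2 = 0 ↔ cB v = cB r) := by
    intro n
    induction n using Nat.strong_induction_on with
    | _ n ihn =>
      intro v k hv hk
      by_cases h0 : k = 0
      · subst h0
        have hvr := P.zero v hv
        subst hvr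
        simp
      · obtain ⟨u, hadj, hu⟩ := P.parent v k hv h0
        have hk0 := P.nonneg v k hv
        have hk1 := P.nonneg u (k - 1) hu
        have hur : PvReach g r u := P.reach u (pvGet?_contains hu)
        have hne := hcB u hur v hadj
        have hih := ihn (k - 1).toNat (by omega) u (k - 1) hu rfl
        constructor
        · intro hke
          have hodd : ¬ ((k - 1) % 2 = 0) := by omega
          rw [hih] at hodd
          cases hcu : cB u <;> cases hcv : cB v <;> cases hcr : cB r <;> simp_all
        · intro hvr
          by_contra hke
          have hev : (k - 1) % 2 = 0 := by omega
          rw [hih] at hev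
          cases hcu : cB u <;> cases hcv : cB v <;> cases hcr : cB r <;> simp_all
  intro u w ku kw hu hadj hw
  have hur : PvReach g r u := P.reach u (pvGet?_contains hu)
  have hne := hcB u hur w hadj
  have h1 := hpar ku.toNat u ku hu rfl
  have h2 := hpar kw.toNat w kw hw rfl
  have hku := P.nonneg u ku hu
  have hkw := P.nonneg w kw hw
  by_cases e1 : ku % 2 = 0 <;> by_cases e2 : kw % 2 = 0
  · rw [h1] at e1; rw [h2] at e2
    exact absurd (e1.trans e2.symm) hne
  · omega
  · omega
  · have e1' : cB u ≠ cB r := fun hh => e1 (h1.mpr hh)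
    have e2' : cB w ≠ cB r := fun hh => e2 (h2.mpr hh)
    cases hcu : cB u <;> cases hcw : cB w <;> cases hcr : cB r <;> simp_all

theorem pvLev_keysrange {g : PySem.Dict Int (List Int)} {r : Int} {L : PySem.Dict Int Int}
    (hg : PvSym g) (P : PvLev g r L) : ∀ v ∈ L.keys, v = r ∨ g.contains v = true := by
  intro v hv
  obtain ⟨k, hk⟩ := pvContains_get? ((PySem.Dict.contains_iff_mem_keys _ _).mpr hv)
  by_cases h0 : k = 0
  · subst h0; exact Or.inl (P.zero v hk)
  · obtain ⟨u, hadj, _⟩ := P.parent v k hk h0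
    exact Or.inr (hg.2 u v hadj)

theorem pvReach_iff {g : PySem.Dict Int (List Int)} (hg : PvSym g) {r v : Int}
    (h : PvReach g r v) : ∀ u, PvReach g v u ↔ PvReach g r u :=
  fun u => ⟨fun h2 => pvReach_trans h h2, fun h2 => pvReach_trans (pvReach_symm hg h) h2⟩

theorem pvBip_congr {g : PySem.Dict Int (List Int)} (hg : PvSym g) {r v : Int}
    (h : PvReach g r v) : (PvBip g v ↔ PvBip g r) := by
  constructor
  · rintro ⟨cB, hcB⟩
    exact ⟨cB, fun u hu w hw => hcB u ((pvReach_iff hg h u).mpr hu) w hw⟩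
  · rintro ⟨cB, hcB⟩
    exact ⟨cB, fun u hu w hw => hcB u ((pvReach_iff hg h u).mp hu) w hw⟩

-- membership characterisation of dict values (nodup keys)
theorem pvMem_values {D : PySem.Dict Int Int} (hnd : D.keys.Nodup) (x : Int) :
    x ∈ D.values ↔ ∃ k, D.get? k = some x := by
  rw [PySem.Dict.values_eq_map_keys D hnd 0]
  constructor
  · intro hx
    obtain ⟨k, hk, hkx⟩ := List.mem_map.mp hx
    obtain ⟨c, hc⟩ := pvContains_get? ((PySem.Dict.contains_iff_mem_keys _ _).mpr hk)
    refine ⟨k, ?_⟩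
    rw [hc]
    rw [PySem.Dict.getD_eq_get?_getD, hc] at hkx
    exact congrArg some hkx
  · rintro ⟨k, hk⟩
    refine List.mem_map.mpr ⟨k, ?_, ?_⟩
    · exact (PySem.Dict.contains_iff_mem_keys _ _).mp (pvGet?_contains hk)
    · rw [PySem.Dict.getD_eq_get?_getD, hk]; rfl

theorem pvMaxList_eq {l1 l2 : List Int} (hmem : ∀ x, x ∈ l1 ↔ x ∈ l2) :
    (PySem.List.max? l1 (fun x => x)).getD 0 = (PySem.List.max? l2 (fun x => x)).getD 0 := by
  cases h1 : PySem.List.max? l1 (fun x => x) with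
  | none =>
    have hl1 : l1 = [] := (PySem.List.max?_eq_none_iff _ _).mp h1
    have hl2 : l2 = [] := by
      cases l2 with
      | nil => rfl
      | cons a t => exact absurd ((hmem a).mpr (by simp)) (by simp [hl1])
    rw [hl2]
    rfl
  | some m1 =>
    have hm1l : m1 ∈ l2 := (hmem m1).mp (PySem.List.max?_mem h1)
    cases h2 : PySem.List.max? l2 (fun x => x) with
    | none =>
      rw [(PySem.List.max?_eq_none_iff _ _).mp h2] at hm1l
      exact absurd hm1l (by simp)
    | some m2 =>
      have hb1 := PySem.List.max?_isMax h1
      have hb2 := PySem.List.max?_isMax h2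
      have hle1 : m1 ≤ m2 := hb2 m1 hm1l
      have hle2 : m2 ≤ m1 := hb1 m2 ((hmem m2).mpr (PySem.List.max?_mem h2))
      simp only [Option.getD_some]
      omega

def pvMaxV (D : PySem.Dict Int Int) : Int := (PySem.List.max? D.values (fun x => x)).getD 0

theorem pvMaxV_eq {D E : PySem.Dict Int Int} (hD : D.keys.Nodup) (hE : E.keys.Nodup)
    (hpt : ∀ v, D.get? v = E.get? v) : pvMaxV D = pvMaxV E := by
  refine pvMaxList_eq ?_
  intro x
  rw [pvMem_values hD, pvMem_values hE]
  constructor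
  · rintro ⟨k, hk⟩; exact ⟨k, by rw [← hpt]; exact hk⟩
  · rintro ⟨k, hk⟩; exact ⟨k, by rw [hpt]; exact hk⟩

theorem pvMaxV_nonneg {g : PySem.Dict Int (List Int)} {r : Int} {L : PySem.Dict Int Int}
    (P : PvLev g r L) : 0 ≤ pvMaxV L := by
  have h0 : (0 : Int) ∈ L.values := (pvMem_values P.nodupK 0).mpr ⟨r, P.rootIn⟩
  cases h : PySem.List.max? L.values (fun x => x) with
  | none =>
    rw [(PySem.List.max?_eq_none_iff _ _).mp h] at h0
    exact absurd h0 (by simp)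
  | some m =>
    have := PySem.List.max?_isMax h 0 h0
    unfold pvMaxV
    rw [h]
    simpa using this

theorem pvBfsA_root_some {g : PySem.Dict Int (List Int)} (hg : PvSym g)
    (hgnd : g.keys.Nodup) (r : Int) (hbip : PvBip g r) :
    ∃ col', pvBfsA g (pvMassA g + 3) [(r, 0)] PySem.Dict.empty = some col' ∧
      (∀ v, col'.get? v = (pvLevels g (pvMassA g + 3) r).get? v) ∧ col'.keys.Nodup := by
  have P := pvLevels_props g hg r
  set L := pvLevels g (pvMassA g + 3) r with hL
  have hnc : PvNoConf g L := pvBip_noconf hg P hbip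
  have inv : PvBInv g L [(r, 0)] PySem.Dict.empty := by
    refine ⟨?_, ?_, ?_, ?_, ?_⟩
    · intro v c hv; rw [PySem.Dict.get?_empty] at hv; exact absurd hv (by simp)
    · intro e he; rcases List.mem_singleton.mp he with rfl; exact P.rootIn
    · exact ⟨0, [(r, 0)], [], rfl, by simp, by simp, fun v k hv _ => P.nonneg v k hv⟩
    · intro v k hv hvc
      by_cases h0 : k = 0
      · subst h0
        left
        rw [P.zero v hv]
        simp
      · obtain ⟨u, hadj, hu⟩ := P.parent v k hv h0
        exact Or.inr ⟨u, hadj, hu, PySem.Dict.contains_empty _⟩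
    · rw [show (PySem.Dict.empty : PySem.Dict Int Int).keys = [] from rfl]; exact List.nodup_nil
  have hfilter : L.keys.filter (fun v => !(PySem.Dict.empty : PySem.Dict Int Int).contains v)
      = L.keys := by
    refine List.filter_eq_self.mpr ?_
    intro a _
    simp [PySem.Dict.contains_empty]
  have hM : pvBM g L PySem.Dict.empty [(r, 0)] < pvMassA g + 3 := by
    unfold pvBM
    rw [hfilter, pvSum_map_succ]
    have h1 := pvSum_deg_le g hgnd L.keys P.nodupK
    have h2 := pvKeys_le (pvLev_keysrange hg P) P.nodupK
    unfold pvMassA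
    simp only [List.length_singleton]
    omega
  exact pvBfsA_success hg P hnc _ _ _ inv hM

theorem pvBfsA_root_none {g : PySem.Dict Int (List Int)} (hg : PvSym g) (F : Nat) (r : Int)
    (hnbip : ¬ PvBip g r) : pvBfsA g F [(r, 0)] PySem.Dict.empty = none := by
  cases h : pvBfsA g F [(r, 0)] PySem.Dict.empty with
  | none => rfl
  | some col' => exact absurd (pvBip_of_some hg r h) hnbip

theorem pvCompA_success {g : PySem.Dict Int (List Int)} (hg : PvSym g)
    (hgnd : g.keys.Nodup) :
    ∀ (S : List Int), (∀ v ∈ S, PvBip g v) → ∀ mc,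
      pvCompA g (pvMassA g + 3) S mc
        = some (S.foldl (fun m v => max m (pvMaxV (pvLevels g (pvMassA g + 3) v) + 1)) mc) := by
  intro S
  induction S with
  | nil => intro _ mc; rfl
  | cons v S' ih =>
    intro hbip mc
    obtain ⟨col', hrun, hpt, hnd⟩ := pvBfsA_root_some hg hgnd v (hbip v (by simp))
    have Pv := pvLevels_props g hg v
    rw [pvCompA, hrun]
    have hmv : (PySem.List.max? col'.values (fun x => x)).getD 0
        = pvMaxV (pvLevels g (pvMassA g + 3) v) := pvMaxV_eq hnd Pv.nodupK hpt
    show pvCompA g (pvMassA g + 3) S'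
        (max mc ((PySem.List.max? col'.values (fun x => x)).getD 0 + 1)) = _
    rw [hmv, ih (fun x hx => hbip x (List.mem_cons_of_mem _ hx))]
    rfl

theorem pvCompA_none {g : PySem.Dict Int (List Int)} (hg : PvSym g) (F : Nat)
    (v : Int) (S : List Int) (mc : Int) (hnbip : ¬ PvBip g v) :
    pvCompA g F (v :: S) mc = none := by
  rw [pvCompA, pvBfsA_root_none hg F v hnbip]

theorem pvCheckB_spec (g : PySem.Dict Int (List Int)) (lev : PySem.Dict Int Int) :
    ∀ cs, pvCheckB g lev cs = true ↔
      ∀ u ∈ cs, ∀ w ∈ pvAdj g u, (lev.getD u 0 + lev.getD w 0) % 2 ≠ 0 := by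
  intro cs
  induction cs with
  | nil => simp [pvCheckB]
  | cons u cs ih =>
    rw [pvCheckB]
    by_cases hany : (g.getD u []).any
        (fun w => PySem.Int.mod (lev.getD u 0 + lev.getD w 0) 2 == 0) = true
    · rw [if_pos hany]
      obtain ⟨w, hw, hmod⟩ := List.any_eq_true.mp hany
      simp only [beq_iff_eq] at hmod
      rw [PySem.Int.mod_eq_emod_of_pos (by norm_num)] at hmod
      constructor
      · intro hfalse; exact absurd hfalse (by simp)
      · intro hall
        exact absurd hmod (hall u (by simp) w hw)
    · rw [if_neg hany, ih]
      have hnone : ∀ w ∈ pvAdj g u, (lev.getD u 0 + lev.getD w 0) % 2 ≠ 0 := by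
        intro w hw hmod
        apply hany
        refine List.any_eq_true.mpr ⟨w, hw, ?_⟩

        simp only [beq_iff_eq]
        rw [PySem.Int.mod_eq_emod_of_pos (by norm_num)]
        exact hmod
      constructor
      · intro hall x hx w hw
        rcases List.mem_cons.mp hx with rfl | hx'
        · exact hnone w hw
        · exact hall x hx' w hw
      · intro hall x hx w hw
        exact hall x (List.mem_cons_of_mem _ hx) w hw

theorem pvCheckB_iff {g : PySem.Dict Int (List Int)} {r : Int} {L : PySem.Dict Int Int}
    (hg : PvSym g) (P : PvLev g r L) : pvCheckB g L L.keys = true ↔ PvBip g r := by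
  rw [pvCheckB_spec]
  constructor
  · intro hall
    refine ⟨fun v => decide (L.getD v 0 % 2 = 1), ?_⟩
    intro u hu w hw
    have hcu : L.contains u = true := P.complete u hu
    obtain ⟨ku, hku⟩ := pvContains_get? hcu
    obtain ⟨kw, hkw, _⟩ := P.closureAll u ku hku w hw
    have h1 := hall u ((PySem.Dict.contains_iff_mem_keys _ _).mp hcu) w hw
    have hgu : L.getD u 0 = ku := by rw [PySem.Dict.getD_eq_get?_getD, hku]; rfl
    have hgw : L.getD w 0 = kw := by rw [PySem.Dict.getD_eq_get?_getD, hkw]; rfl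
    rw [hgu, hgw] at h1
    show decide (L.getD u 0 % 2 = 1) ≠ decide (L.getD w 0 % 2 = 1)
    rw [hgu, hgw]
    intro heq
    rw [decide_eq_decide] at heq
    omega
  · intro hbip
    have hnc := pvBip_noconf hg P hbip
    intro u hu w hw
    obtain ⟨ku, hku⟩ := pvContains_get? ((PySem.Dict.contains_iff_mem_keys _ _).mpr hu)
    obtain ⟨kw, hkw, _⟩ := P.closureAll u ku hku w hw
    have hodd := hnc u w ku kw hku hw hkw
    have hgu : L.getD u 0 = ku := by rw [PySem.Dict.getD_eq_get?_getD, hku]; rfl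
    have hgw : L.getD w 0 = kw := by rw [PySem.Dict.getD_eq_get?_getD, hkw]; rfl
    rw [hgu, hgw]
    omega

theorem pvFoldMap (l : List Int) (f : Int → Int) :
    ∀ a : Int, l.foldl (fun m v => max m (f v)) a = (l.map f).foldl max a := by
  induction l with
  | nil => intro a; rfl
  | cons x t ih => intro a; simp only [List.foldl_cons, List.map_cons]; exact ih _

theorem pvCompMax_eq (S comp : List Int) (f : Int → Int) (hmem : ∀ x, x ∈ S ↔ x ∈ comp)
    (hne : S ≠ []) (hf : ∀ v ∈ comp, 0 ≤ f v) :
    S.foldl (fun m v => max m (f v + 1)) (-1)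
      = 1 + (PySem.List.max? (comp.map f) (fun x => x)).getD 0 := by
  rw [show (fun (m v : Int) => max m (f v + 1)) = fun m v => max m ((fun x => f x + 1) v) from rfl]
  rw [pvFoldMap S (fun x => f x + 1) (-1)]
  obtain ⟨v₀, hv₀⟩ : ∃ v, v ∈ S := by
    cases S with | nil => exact absurd rfl hne | cons a t => exact ⟨a, by simp⟩
  have hb := PySem.List.le_foldl_max (S.map (fun x => f x + 1)) (-1)
  have hmem₀ : (f v₀ + 1) ∈ S.map (fun x => f x + 1) := List.mem_map.mpr ⟨v₀, hv₀, rfl⟩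
  have hge1 : 1 ≤ (S.map (fun x => f x + 1)).foldl max (-1) := by
    have h1 := hb.2 _ hmem₀
    have h2 := hf v₀ ((hmem v₀).mp hv₀)
    omega
  have hMmem : (S.map (fun x => f x + 1)).foldl max (-1) ∈ S.map (fun x => f x + 1) := by
    rcases PySem.List.foldl_max_mem (S.map (fun x => f x + 1)) (-1) with h | h
    · omega
    · exact h
  obtain ⟨v₁, hv₁, hMv⟩ := List.mem_map.mp hMmem
  cases hmax : PySem.List.max? (comp.map f) (fun x => x) with
  | none =>
    have := (PySem.List.max?_eq_none_iff _ _).mp hmax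
    have : comp = [] := by
      cases comp with | nil => rfl | cons a t => simp at this
    rw [this] at hmem
    exact absurd ((hmem v₀).mp hv₀) (by simp)
  | some m =>
    have hmmem := PySem.List.max?_mem hmax
    have hmbound := PySem.List.max?_isMax hmax
    obtain ⟨w, hw, hwm⟩ := List.mem_map.mp hmmem
    -- m = f w, w ∈ comp; M = f v₁ + 1, v₁ ∈ S
    have h1 : f v₁ ≤ m := by
      have := hmbound (f v₁) (List.mem_map.mpr ⟨v₁, (hmem v₁).mp hv₁, rfl⟩)
      simpa using this
    have h2 : f w + 1 ≤ (S.map (fun x => f x + 1)).foldl max (-1) :=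
      hb.2 _ (List.mem_map.mpr ⟨w, (hmem w).mpr hw, rfl⟩)
    simp only [Option.getD_some]
    omega


-- A's DFS with the partitions dict projected away
def pvDfsS (g : PySem.Dict Int (List Int)) : Nat → Int → PySem.Set Int → PySem.Set Int
  | 0, _, s => s
  | fuel+1, node, s =>
    if s.contains node then s
    else (g.getD node []).foldl (fun s' nb => pvDfsS g fuel nb s') (PySem.Set.add s node)

theorem pvDfsS_mono (g : PySem.Dict Int (List Int)) :
    ∀ (fuel : Nat) (node : Int) (s : PySem.Set Int) (x : Int), x ∈ s →
      x ∈ pvDfsS g fuel node s := by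
  intro fuel
  induction fuel with
  | zero => intro node s x hx; exact hx
  | succ fuel ih =>
    intro node s x hx
    rw [pvDfsS]
    split
    · exact hx
    · have key : ∀ (ws : List Int) (s₀ : PySem.Set Int), x ∈ s₀ →
          x ∈ ws.foldl (fun s' nb => pvDfsS g fuel nb s') s₀ := by
        intro ws
        induction ws with
        | nil => intro s₀ h; exact h
        | cons w ws ihw => intro s₀ h; exact ihw _ (ih w s₀ x h)
      exact key _ _ ((PySem.Set.mem_add s node x).mpr (Or.inl hx))

theorem pvDfsSfold_mono (g : PySem.Dict Int (List Int)) (fuel : Nat) :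
    ∀ (ws : List Int) (s : PySem.Set Int) (x : Int), x ∈ s →
      x ∈ ws.foldl (fun s' nb => pvDfsS g fuel nb s') s := by
  intro ws
  induction ws with
  | nil => intro s x h; exact h
  | cons w ws ihw => intro s x h; exact ihw _ x (pvDfsS_mono g fuel w s x h)

theorem pvDfsS_nodup (g : PySem.Dict Int (List Int)) :
    ∀ (fuel : Nat) (node : Int) (s : PySem.Set Int), s.Nodup →
      (pvDfsS g fuel node s).Nodup := by
  intro fuel
  induction fuel with
  | zero => intro _ _ h; exact h
  | succ fuel ih =>
    intro node s hs
    rw [pvDfsS]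
    split
    · exact hs
    · have key : ∀ (ws : List Int) (s₀ : PySem.Set Int), s₀.Nodup →
          (ws.foldl (fun s' nb => pvDfsS g fuel nb s') s₀).Nodup := by
        intro ws
        induction ws with
        | nil => intro s₀ h; exact h
        | cons w ws ihw => intro s₀ h; exact ihw _ (ih w s₀ h)
      exact key _ _ (PySem.Set.nodup_add s node hs)

theorem pvDfsS_sound (g : PySem.Dict Int (List Int)) :
    ∀ (fuel : Nat) (node : Int) (s : PySem.Set Int) (x : Int),
      x ∈ pvDfsS g fuel node s → x ∈ s ∨ PvReach g node x := by
  intro fuel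
  induction fuel with
  | zero => intro node s x hx; exact Or.inl hx
  | succ fuel ih =>
    intro node s x hx
    rw [pvDfsS] at hx
    split at hx
    · exact Or.inl hx
    · have key : ∀ (ws : List Int), (∀ w ∈ ws, w ∈ pvAdj g node) →
          ∀ (s₀ : PySem.Set Int),
          (∀ y, y ∈ s₀ → y ∈ s ∨ PvReach g node y) →
          ∀ y, y ∈ ws.foldl (fun s' nb => pvDfsS g fuel nb s') s₀ →
            y ∈ s ∨ PvReach g node y := by
        intro ws
        induction ws with
        | nil => intro _ s₀ hs₀ y hy; exact hs₀ y hy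
        | cons w ws ihw =>
          intro hws s₀ hs₀ y hy
          refine ihw (fun a ha => hws a (List.mem_cons_of_mem _ ha)) _ ?_ y hy
          intro z hz
          rcases ih w s₀ z hz with h | h
          · exact hs₀ z h
          · exact Or.inr (pvReach_trans (PvReach.step PvReach.refl (hws w (by simp))) h)
      refine key _ (fun w hw => hw) _ ?_ x hx
      intro y hy
      rcases (PySem.Set.mem_add s node y).mp hy with h | rfl
      · exact Or.inl h
      · exact Or.inr PvReach.refl

theorem pvDfsS_complete (g : PySem.Dict Int (List Int)) (hg : PvSym g) (U : Finset Int)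
    (hU : ∀ x, g.contains x = true → x ∈ U) :
    ∀ (fuel : Nat) (node : Int) (s : PySem.Set Int), node ∈ U →
      (U.filter (fun x => x ∉ s)).card < fuel →
      node ∈ pvDfsS g fuel node s ∧
      (∀ v, v ∈ pvDfsS g fuel node s → v ∉ s →
        ∀ w ∈ pvAdj g v, w ∈ pvDfsS g fuel node s) := by
  classical
  intro fuel
  induction fuel with
  | zero => intro node s _ hcard; omega
  | succ fuel ih =>
    intro node s hnodeU hcard
    rw [pvDfsS]
    by_cases hseen : s.contains node = true
    · rw [if_pos hseen]
      refine ⟨(PySem.Set.contains_iff _ _).mp hseen, ?_⟩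
      intro v hv hvs w hw
      exact absurd hv hvs
    · rw [if_neg hseen]
      have hnode_s : node ∉ s := fun h => hseen ((PySem.Set.contains_iff _ _).mpr h)
      set s₁ := PySem.Set.add s node with hs₁
      have hns₁ : node ∈ s₁ := (PySem.Set.mem_add s node node).mpr (Or.inr rfl)
      have hsub₁ : ∀ x, x ∈ s → x ∈ s₁ := fun x hx => (PySem.Set.mem_add s node x).mpr (Or.inl hx)
      have hcard₁ : (U.filter (fun x => x ∉ s₁)).card < fuel := by
        have hss : U.filter (fun x => x ∉ s₁) ⊆ U.filter (fun x => x ∉ s) := by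
          intro x hx
          rw [Finset.mem_filter] at hx ⊢
          exact ⟨hx.1, fun hxs => hx.2 (hsub₁ x hxs)⟩
        have hne : node ∈ U.filter (fun x => x ∉ s) := by
          rw [Finset.mem_filter]; exact ⟨hnodeU, hnode_s⟩
        have hnn : node ∉ U.filter (fun x => x ∉ s₁) := by
          rw [Finset.mem_filter]; intro h; exact h.2 hns₁
        have := Finset.card_lt_card (Finset.ssubset_iff_of_subset hss |>.mpr ⟨node, hne, hnn⟩)
        omega
      -- fold over the neighbour list
      have key : ∀ (ws : List Int), (∀ w ∈ ws, w ∈ pvAdj g node) →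
          ∀ (s₀ : PySem.Set Int), (∀ x, x ∈ s₁ → x ∈ s₀) →
          (∀ v, v ∈ s₀ → v ∉ s → v ≠ node → ∀ w ∈ pvAdj g v, w ∈ s₀) →
          (∀ x, x ∈ s₀ → x ∈ ws.foldl (fun s' nb => pvDfsS g fuel nb s') s₀) ∧
          (∀ w ∈ ws, w ∈ ws.foldl (fun s' nb => pvDfsS g fuel nb s') s₀) ∧
          (∀ v, v ∈ ws.foldl (fun s' nb => pvDfsS g fuel nb s') s₀ → v ∉ s → v ≠ node →
            ∀ w ∈ pvAdj g v, w ∈ ws.foldl (fun s' nb => pvDfsS g fuel nb s') s₀) := by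
        intro ws
        induction ws with
        | nil =>
          intro _ s₀ hsub hexp
          exact ⟨fun x hx => hx, by simp, fun v hv hvs hvn w hw => hexp v hv hvs hvn w hw⟩
        | cons nb ws ihw =>
          intro hws s₀ hsub hexp
          have hnbU : nb ∈ U := hU nb (hg.2 node nb (hws nb (by simp)))
          have hcard₀ : (U.filter (fun x => x ∉ s₀)).card < fuel := by
            have hss : U.filter (fun x => x ∉ s₀) ⊆ U.filter (fun x => x ∉ s₁) := by
              intro x hx
              rw [Finset.mem_filter] at hx ⊢
              exact ⟨hx.1, fun hxs => hx.2 (hsub x hxs)⟩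
            have := Finset.card_le_card hss
            omega
          obtain ⟨hnb_in, hnb_exp⟩ := ih nb s₀ hnbU hcard₀
          set s₂ := pvDfsS g fuel nb s₀ with hs₂
          have hsub₂ : ∀ x, x ∈ s₁ → x ∈ s₂ := fun x hx =>
            pvDfsS_mono g fuel nb s₀ x (hsub x hx)
          have hexp₂ : ∀ v, v ∈ s₂ → v ∉ s → v ≠ node → ∀ w ∈ pvAdj g v, w ∈ s₂ := by
            intro v hv hvs hvn w hw
            by_cases hv₀ : v ∈ s₀
            · exact pvDfsS_mono g fuel nb s₀ w (hexp v hv₀ hvs hvn w hw)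
            · exact hnb_exp v hv hv₀ w hw
          obtain ⟨k1, k2, k3⟩ := ihw (fun a ha => hws a (List.mem_cons_of_mem _ ha)) s₂ hsub₂ hexp₂
          refine ⟨?_, ?_, k3⟩
          · intro x hx
            exact k1 x (pvDfsS_mono g fuel nb s₀ x hx)
          · intro w hw
            rcases List.mem_cons.mp hw with rfl | hw'
            · exact k1 w hnb_in
            · exact k2 w hw'
      obtain ⟨k1, k2, k3⟩ := key (g.getD node []) (fun w hw => hw) s₁
        (fun x hx => hx) (by
          intro v hv hvs hvn w hw
          rcases (PySem.Set.mem_add s node v).mp hv with h | h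
          · exact absurd h hvs
          · exact absurd h hvn)
      refine ⟨k1 node hns₁, ?_⟩
      intro v hv hvs w hw
      by_cases hvn : v = node
      · subst hvn
        exact k2 w hw
      · exact k3 v hv hvs hvn w hw


theorem pvDfsS_char (g : PySem.Dict Int (List Int)) (hg : PvSym g) (U : Finset Int)
    (hU : ∀ x, g.contains x = true → x ∈ U) (fuel : Nat) (node : Int) (s : PySem.Set Int)
    (hnU : node ∈ U) (hcard : (U.filter (fun x => x ∉ s)).card < fuel)
    (hcl : ∀ v ∈ s, ∀ w ∈ pvAdj g v, w ∈ s) (hns : node ∉ s) :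
    ∀ x, x ∈ pvDfsS g fuel node s ↔ (x ∈ s ∨ PvReach g node x) := by
  obtain ⟨hin, hexp⟩ := pvDfsS_complete g hg U hU fuel node s hnU hcard
  intro x
  constructor
  · exact pvDfsS_sound g fuel node s x
  · rintro (hx | hx)
    · exact pvDfsS_mono g fuel node s x hx
    · induction hx with
      | refl => exact hin
      | step hr hadj ihr =>
        rename_i u w
        have hus : u ∉ s := pvReach_not_mem_closed hg hcl hns hr
        exact hexp u ihr hus w hadj

theorem pvModify_eq (d : PySem.Dict Int (PySem.Set Int)) (k : Int) (d0 : PySem.Set Int)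
    (f : PySem.Set Int → PySem.Set Int) :
    d.modify k d0 f = d.insert k (f (d.getD k d0)) := rfl

theorem pvModify_modify (d : PySem.Dict Int (PySem.Set Int)) (k : Int)
    (f h : PySem.Set Int → PySem.Set Int) :
    (d.modify k PySem.Set.empty f).modify k PySem.Set.empty h
      = d.modify k PySem.Set.empty (fun s => h (f s)) := by
  rw [pvModify_eq, pvModify_eq, pvModify_eq]
  rw [PySem.Dict.getD_insert_self]
  rw [PySem.Dict.insert_insert_self]

theorem pvUpdate_cons (s : PySem.Set Int) (x : Int) (l : List Int) :
    PySem.Set.update s (x :: l) = PySem.Set.update (PySem.Set.add s x) l :=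
  PySem.Set.update_cons s x l

theorem pvDfsA_proj (g : PySem.Dict Int (List Int)) (pk : Int) :
    ∀ (fuel : Nat) (node : Int) (st : PySem.Set Int × PySem.Dict Int (PySem.Set Int)),
      (pvDfsA g pk fuel node st).1 = pvDfsS g fuel node st.1 ∧
      ∃ Δ : List Int,
        ((pvDfsA g pk fuel node st).2
            = st.2.modify pk PySem.Set.empty (fun s => PySem.Set.update s Δ) ∧ Δ ≠ []
          ∨ ((pvDfsA g pk fuel node st).2 = st.2 ∧ pvDfsS g fuel node st.1 = st.1 ∧ Δ = [])) ∧
        (∀ x, x ∈ Δ ↔ x ∈ pvDfsS g fuel node st.1 ∧ x ∉ st.1) := by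
  intro fuel
  induction fuel with
  | zero =>
    intro node st
    exact ⟨rfl, [], Or.inr ⟨rfl, rfl, rfl⟩, by simp [pvDfsS]⟩
  | succ fuel ih =>
    intro node st
    rw [pvDfsA, pvDfsS]
    by_cases hseen : st.1.contains node = true
    · rw [if_pos hseen, if_pos hseen]
      exact ⟨rfl, [], Or.inr ⟨rfl, rfl, rfl⟩, by simp⟩
    · rw [if_neg hseen, if_neg hseen]
      have hns : node ∉ st.1 := fun h => hseen ((PySem.Set.contains_iff _ _).mpr h)
      -- fold claim
      have FC : ∀ (ws : List Int) (σ : PySem.Set Int) (π : PySem.Dict Int (PySem.Set Int)),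
          (ws.foldl (fun st' nb => pvDfsA g pk fuel nb st') (σ, π)).1
            = ws.foldl (fun s' nb => pvDfsS g fuel nb s') σ ∧
          ∃ Δ : List Int,
            ((ws.foldl (fun st' nb => pvDfsA g pk fuel nb st') (σ, π)).2
                = π.modify pk PySem.Set.empty (fun s => PySem.Set.update s Δ) ∧ Δ ≠ []
              ∨ ((ws.foldl (fun st' nb => pvDfsA g pk fuel nb st') (σ, π)).2 = π ∧
                  ws.foldl (fun s' nb => pvDfsS g fuel nb s') σ = σ ∧ Δ = [])) ∧
            (∀ x, x ∈ Δ ↔ x ∈ ws.foldl (fun s' nb => pvDfsS g fuel nb s') σ ∧ x ∉ σ) := by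
        intro ws
        induction ws with
        | nil =>
          intro σ π
          exact ⟨rfl, [], Or.inr ⟨rfl, rfl, rfl⟩, by simp⟩
        | cons nb ws ihw =>
          intro σ π
          simp only [List.foldl_cons]
          obtain ⟨h1, Δ₁, hd₁, hm₁⟩ := ih nb (σ, π)
          set R₁ := pvDfsS g fuel nb σ with hR₁
          have hstep : pvDfsA g pk fuel nb (σ, π)
              = (R₁, (pvDfsA g pk fuel nb (σ, π)).2) := by
            exact Prod.ext h1 rfl
          rw [hstep]
          obtain ⟨h2, Δ₂, hd₂, hm₂⟩ := ihw R₁ (pvDfsA g pk fuel nb (σ, π)).2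
          set R₂ := ws.foldl (fun s' nb => pvDfsS g fuel nb s') R₁ with hR₂
          have hmono₁ : ∀ x, x ∈ σ → x ∈ R₁ := fun x hx => pvDfsS_mono g fuel nb σ x hx
          have hmono₂ : ∀ x, x ∈ R₁ → x ∈ R₂ := fun x hx => pvDfsSfold_mono g fuel ws R₁ x hx
          refine ⟨h2, ?_⟩
          rcases hd₁ with ⟨he₁, hne₁⟩ | ⟨he₁, hid₁, hΔe₁⟩
          · rcases hd₂ with ⟨he₂, hne₂⟩ | ⟨he₂, hid₂, hΔe₂⟩
            · refine ⟨Δ₁ ++ Δ₂, Or.inl ⟨?_, by simp [hne₁]⟩, ?_⟩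
              · rw [he₂, he₁, pvModify_modify]
                congr 1
                funext s
                rw [PySem.Set.update_append]
              · intro x
                rw [List.mem_append, hm₁ x, hm₂ x]
                constructor
                · rintro (⟨ha, hb⟩ | ⟨ha, hb⟩)
                  · exact ⟨hmono₂ x ha, hb⟩
                  · exact ⟨ha, fun hx => hb (hmono₁ x hx)⟩
                · rintro ⟨ha, hb⟩
                  by_cases hx1 : x ∈ R₁
                  · exact Or.inl ⟨hx1, hb⟩
                  · exact Or.inr ⟨ha, hx1⟩
            · refine ⟨Δ₁, Or.inl ⟨by rw [he₂, he₁], hne₁⟩, ?_⟩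
              intro x
              rw [hm₁ x]
              rw [show R₂ = R₁ from hid₂]
          · -- first call was a no-op
            rw [he₁] at hd₂ ⊢
            have hRσ : R₁ = σ := hid₁
            rw [hRσ] at hm₂ hd₂ ⊢
            exact ⟨Δ₂, hd₂, hm₂⟩
      obtain ⟨hf1, Δf, hfd, hfm⟩ := FC (g.getD node [])
        (PySem.Set.add st.1 node)
        (st.2.modify pk PySem.Set.empty (fun s => PySem.Set.add s node))
      set RF := (g.getD node []).foldl (fun s' nb => pvDfsS g fuel nb s')
        (PySem.Set.add st.1 node) with hRF
      have hnodeRF : node ∈ RF :=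
        pvDfsSfold_mono g fuel _ _ node ((PySem.Set.mem_add _ _ _).mpr (Or.inr rfl))
      refine ⟨hf1, ?_⟩
      rcases hfd with ⟨he, hne⟩ | ⟨he, hid, hΔe⟩
      · refine ⟨node :: Δf, Or.inl ⟨?_, by simp⟩, ?_⟩
        · rw [he, pvModify_modify]
          refine congrArg _ (funext fun s => ?_)
          rw [pvUpdate_cons]
        · intro x
          simp only [List.mem_cons]
          rw [hfm x]
          constructor
          · rintro (rfl | ⟨ha, hb⟩)
            · exact ⟨hnodeRF, hns⟩
            · refine ⟨ha, fun hx => hb ((PySem.Set.mem_add _ _ _).mpr (Or.inl hx))⟩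
          · rintro ⟨ha, hb⟩
            by_cases hxn : x = node
            · exact Or.inl hxn
            · refine Or.inr ⟨ha, fun hx => ?_⟩
              rcases (PySem.Set.mem_add _ _ _).mp hx with h | h
              · exact hb h
              · exact hxn h
      · refine ⟨[node], Or.inl ⟨?_, by simp⟩, ?_⟩
        · rw [he]
          refine congrArg _ (funext fun s => ?_)
          exact ((pvUpdate_cons s node []).trans (PySem.Set.update_nil _)).symm
        · intro x
          simp only [List.mem_cons, List.not_mem_nil, or_false]
          rw [show RF = PySem.Set.add st.1 node from hid]
          constructor
          · rintro rfl
            exact ⟨(PySem.Set.mem_add _ _ _).mpr (Or.inr rfl), hns⟩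
          · rintro ⟨ha, hb⟩
            rcases (PySem.Set.mem_add _ _ _).mp ha with h | h
            · exact absurd h hb
            · exact h


-- optional-sum views of the two outer loops (none = the -1 early return)
def pvOadd (a b : Option Int) : Option Int := a.bind (fun x => b.map (fun y => x + y))

def pvLoopOpt (g : PySem.Dict Int (List Int)) (F : Nat) : List (Int × PySem.Set Int) → Option Int
  | [] => some 0
  | (_, pset) :: rest =>
    match pvCompA g F pset (-1) with
    | none => none
    | some mc => (pvLoopOpt g F rest).map (fun t => mc + t)

def pvMainOpt (g : PySem.Dict Int (List Int)) (F : Nat) : List Int → PySem.Set Int → Option Int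
  | [], _ => some 0
  | s :: rest, seen =>
    if seen.contains s then pvMainOpt g F rest seen
    else
      let lev := pvLevels g F s
      let comp := lev.keys
      if pvCheckB g lev comp then
        (pvMainOpt g F rest (PySem.Set.update seen comp)).map
          (fun t => (1 + pvEccB g F comp) + t)
      else none

theorem pvLoopA_opt (g : PySem.Dict Int (List Int)) (F : Nat) :
    ∀ (l : List (Int × PySem.Set Int)) (res : Int),
      pvLoopA g F l res = match pvLoopOpt g F l with
        | none => -1
        | some t => res + t := by
  intro l
  induction l with
  | nil => intro res; simp [pvLoopA, pvLoopOpt]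
  | cons e rest ih =>
    intro res
    obtain ⟨z, pset⟩ := e
    rw [pvLoopA, pvLoopOpt]
    cases hc : pvCompA g F pset (-1) with
    | none => rfl
    | some mc =>
      show pvLoopA g F rest (res + mc) = match Option.map (fun t => mc + t) (pvLoopOpt g F rest)
        with | none => -1 | some t => res + t
      rw [ih (res + mc)]
      cases hrest : pvLoopOpt g F rest with
      | none => rfl
      | some t => simp only [Option.map_some]; ring

theorem pvMainB_opt (g : PySem.Dict Int (List Int)) (F : Nat) :
    ∀ (zs : List Int) (seen : PySem.Set Int) (total : Int),
      pvMainB g F zs seen total = match pvMainOpt g F zs seen with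
        | none => -1
        | some t => total + t := by
  intro zs
  induction zs with
  | nil => intro seen total; simp [pvMainB, pvMainOpt]
  | cons s rest ih =>
    intro seen total
    rw [pvMainB, pvMainOpt]
    by_cases hc : seen.contains s = true
    · rw [if_pos hc, if_pos hc]
      exact ih seen total
    · rw [if_neg hc, if_neg hc]
      by_cases hchk : pvCheckB g (pvLevels g F s) (pvLevels g F s).keys = true
      · rw [if_pos hchk, if_pos hchk]
        rw [ih]
        cases hrest : pvMainOpt g F rest (PySem.Set.update seen (pvLevels g F s).keys) with
        | none => rfl
        | some t => simp only [Option.map_some]; ring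
      · rw [if_neg hchk, if_neg hchk]

theorem pvLoopOpt_append (g : PySem.Dict Int (List Int)) (F : Nat) :
    ∀ (l1 l2 : List (Int × PySem.Set Int)),
      pvLoopOpt g F (l1 ++ l2) = pvOadd (pvLoopOpt g F l1) (pvLoopOpt g F l2) := by
  intro l1
  induction l1 with
  | nil =>
    intro l2
    show pvLoopOpt g F l2 = pvOadd (some 0) (pvLoopOpt g F l2)
    cases h : pvLoopOpt g F l2 <;> simp [pvOadd]
  | cons e rest ih =>
    intro l2
    obtain ⟨z, pset⟩ := e
    show pvLoopOpt g F ((z, pset) :: (rest ++ l2)) = _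
    rw [pvLoopOpt, pvLoopOpt]
    cases hc : pvCompA g F pset (-1) with
    | none => simp [pvOadd]
    | some mc =>
      rw [ih l2]
      cases h1 : pvLoopOpt g F rest <;> cases h2 : pvLoopOpt g F l2 <;>
        simp [pvOadd] <;> omega

theorem pvOadd_some_zero (a : Option Int) : pvOadd a (some 0) = a := by
  cases a <;> simp [pvOadd]

theorem pvOadd_assoc (a b c : Option Int) :
    pvOadd (pvOadd a b) c = pvOadd a (pvOadd b c) := by
  cases a <;> cases b <;> cases c <;> simp [pvOadd] <;> omega


theorem pvContains_congr {s t : PySem.Set Int} (hmem : ∀ x, x ∈ s ↔ x ∈ t) (z : Int) :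
    s.contains z = t.contains z := by
  have h := hmem z
  rw [← PySem.Set.contains_iff s z, ← PySem.Set.contains_iff t z] at h
  cases h1 : s.contains z <;> cases h2 : t.contains z <;> simp_all

theorem pvOadd_some_left (a : Int) (b : Option Int) :
    pvOadd (some a) b = b.map (fun t => a + t) := rfl

theorem pvOadd_none_right (a : Option Int) : pvOadd a none = none := by
  cases a <;> rfl

theorem pvOadd_zero_left (b : Option Int) : pvOadd (some 0) b = b := by
  cases b <;> simp [pvOadd]

theorem pvLoopOpt_single (g : PySem.Dict Int (List Int)) (F : Nat) (z : Int)
    (Z : PySem.Set Int) :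
    pvLoopOpt g F [(z, Z)] = match pvCompA g F Z (-1) with
      | none => none
      | some mc => some mc := by
  rw [pvLoopOpt]
  cases h : pvCompA g F Z (-1) with
  | none => rfl
  | some mc => show some (mc + 0) = some mc; simp

theorem pvComp_contrib_bip {g : PySem.Dict Int (List Int)} (hg : PvSym g)
    (hgnd : g.keys.Nodup) (z : Int) (Z : PySem.Set Int)
    (hZ : ∀ x, x ∈ Z ↔ PvReach g z x) (hbip : PvBip g z) :
    pvCompA g (pvMassA g + 3) Z (-1)
      = some (1 + pvEccB g (pvMassA g + 3) (pvLevels g (pvMassA g + 3) z).keys) := by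
  have Pz := pvLevels_props g hg z
  have hkeysmem : ∀ x, x ∈ (pvLevels g (pvMassA g + 3) z).keys ↔ PvReach g z x := by
    intro x
    constructor
    · intro hx
      exact Pz.reach x ((PySem.Dict.contains_iff_mem_keys _ _).mpr hx)
    · intro hx
      exact (PySem.Dict.contains_iff_mem_keys _ _).mp (Pz.complete x hx)
  have hmemZ : ∀ x, x ∈ Z ↔ x ∈ (pvLevels g (pvMassA g + 3) z).keys := by
    intro x; rw [hZ x, hkeysmem x]
  have hbipAll : ∀ v ∈ Z, PvBip g v := by
    intro v hv
    exact (pvBip_congr hg ((hZ v).mp hv)).mpr hbip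
  rw [pvCompA_success hg hgnd Z hbipAll (-1)]
  congr 1
  refine pvCompMax_eq Z (pvLevels g (pvMassA g + 3) z).keys
    (fun v => pvMaxV (pvLevels g (pvMassA g + 3) v)) hmemZ ?_ ?_
  · intro hZnil
    have := (hZ z).mpr PvReach.refl
    rw [hZnil] at this
    exact absurd this (by simp)
  · intro v _
    exact pvMaxV_nonneg (pvLevels_props g hg v)

theorem pvComp_contrib_nbip {g : PySem.Dict Int (List Int)} (hg : PvSym g)
    (z : Int) (Z : PySem.Set Int) (hZ : ∀ x, x ∈ Z ↔ PvReach g z x)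
    (hnbip : ¬ PvBip g z) :
    pvCompA g (pvMassA g + 3) Z (-1) = none := by
  cases hcase : Z with
  | nil =>
    have := (hZ z).mpr PvReach.refl
    rw [hcase] at this
    exact absurd this (by simp)
  | cons h t =>
    have hh : PvReach g z h := (hZ h).mp (by rw [hcase]; simp)
    refine pvCompA_none hg _ h t (-1) ?_
    intro hbh
    exact hnbip ((pvBip_congr hg hh).mp hbh)

theorem pvCheck_of_bip {g : PySem.Dict Int (List Int)} (hg : PvSym g) (z : Int)
    (hbip : PvBip g z) :
    pvCheckB g (pvLevels g (pvMassA g + 3) z) (pvLevels g (pvMassA g + 3) z).keys = true :=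
  (pvCheckB_iff hg (pvLevels_props g hg z)).mpr hbip

theorem pvCheck_of_nbip {g : PySem.Dict Int (List Int)} (hg : PvSym g) (z : Int)
    (hnbip : ¬ PvBip g z) :
    pvCheckB g (pvLevels g (pvMassA g + 3) z) (pvLevels g (pvMassA g + 3) z).keys = false := by
  cases h : pvCheckB g (pvLevels g (pvMassA g + 3) z) (pvLevels g (pvMassA g + 3) z).keys
  · rfl
  · exact absurd ((pvCheckB_iff hg (pvLevels_props g hg z)).mp h) hnbip

theorem pvMain_couple {g : PySem.Dict Int (List Int)} (hg : PvSym g) (hgnd : g.keys.Nodup) :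
    ∀ (zs : List Int) (seenA seenB : PySem.Set Int) (parts : PySem.Dict Int (PySem.Set Int)),
      (∀ x, x ∈ seenA ↔ x ∈ seenB) →
      (∀ v ∈ seenA, ∀ w ∈ pvAdj g v, w ∈ seenA) →
      seenA.Nodup →
      (∀ k ∈ parts.keys, k ∈ seenA) →
      pvLoopOpt g (pvMassA g + 3)
        ((zs.foldl (fun st node => if st.1.contains node then st
            else pvDfsA g node (pvMassA g + 3) node st) (seenA, parts)).2.items)
        = pvOadd (pvLoopOpt g (pvMassA g + 3) parts.items)
            (pvMainOpt g (pvMassA g + 3) zs seenB) := by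
  classical
  intro zs
  induction zs with
  | nil =>
    intro seenA seenB parts hmem hcl hnd hpk
    show pvLoopOpt g (pvMassA g + 3) parts.items = _
    rw [pvMainOpt, pvOadd_some_zero]
  | cons z rest ih =>
    intro seenA seenB parts hmem hcl hnd hpk
    simp only [List.foldl_cons]
    have hcz : seenA.contains z = seenB.contains z := pvContains_congr hmem z
    by_cases hseen : seenA.contains z = true
    · rw [if_pos hseen]
      rw [show pvMainOpt g (pvMassA g + 3) (z :: rest) seenB
          = pvMainOpt g (pvMassA g + 3) rest seenB by
        rw [pvMainOpt, if_pos (hcz ▸ hseen)]]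
      exact ih seenA seenB parts hmem hcl hnd hpk
    · rw [if_neg hseen]
      have hzs : z ∉ seenA := fun h => hseen ((PySem.Set.contains_iff _ _).mpr h)
      -- DFS projection and characterisation
      obtain ⟨h1, Δ, hd, hm⟩ := pvDfsA_proj g z (pvMassA g + 3) z (seenA, parts)
      have hU : ∀ x, g.contains x = true → x ∈ insert z g.keys.toFinset := by
        intro x hx
        exact Finset.mem_insert_of_mem (List.mem_toFinset.mpr
          ((PySem.Dict.contains_iff_mem_keys _ _).mp hx))
      have hcard : ((insert z g.keys.toFinset).filter (fun x => x ∉ seenA)).card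
          < pvMassA g + 3 := by
        have hle1 := Finset.card_filter_le (insert z g.keys.toFinset) (fun x => x ∉ seenA)
        have hle2 := Finset.card_insert_le z g.keys.toFinset
        have hle3 := List.toFinset_card_le g.keys
        have hkeq : g.keys.length = g.items.length := by
          show (g.items.map _).length = _
          exact List.length_map ..
        unfold pvMassA
        omega
      have hchar := pvDfsS_char g hg (insert z g.keys.toFinset) hU (pvMassA g + 3) z seenA
        (Finset.mem_insert_self _ _) hcard hcl hzs
      have hzin : z ∈ pvDfsS g (pvMassA g + 3) z seenA := (hchar z).mpr (Or.inr PvReach.refl)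
      -- the modify branch must have fired
      have hdd : (pvDfsA g z (pvMassA g + 3) z (seenA, parts)).2
          = parts.modify z PySem.Set.empty (fun s => PySem.Set.update s Δ) := by
        rcases hd with ⟨he, _⟩ | ⟨_, hid, _⟩
        · exact he
        · rw [hid] at hzin
          exact absurd hzin hzs
      have hcontz : parts.contains z = false := by
        cases hc : parts.contains z
        · rfl
        · exact absurd (hpk z ((PySem.Dict.contains_iff_mem_keys _ _).mp hc)) hzs
      set Z := PySem.Set.update PySem.Set.empty Δ with hZdef
      have hitems : (pvDfsA g z (pvMassA g + 3) z (seenA, parts)).2.items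
          = parts.items ++ [(z, Z)] := by
        rw [hdd, pvModify_eq, PySem.Dict.getD_of_not_contains _ _ hcontz]
        exact PySem.Dict.items_insert_of_not_contains _ _ hcontz
      have hZmem : ∀ x, x ∈ Z ↔ PvReach g z x := by
        intro x
        rw [hZdef]
        rw [PySem.Set.mem_update]
        constructor
        · rintro (h | h)
          · exact absurd h (by simp [PySem.Set.empty])
          · rcases ((hchar x).mp ((hm x).mp h).1) with h2 | h2
            · exact absurd h2 ((hm x).mp h).2
            · exact h2
        · intro h
          right
          refine (hm x).mpr ⟨(hchar x).mpr (Or.inr h), ?_⟩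
          exact pvReach_not_mem_closed hg hcl hzs h
      -- new seen states
      have hmemA' : ∀ x, x ∈ (pvDfsA g z (pvMassA g + 3) z (seenA, parts)).1
          ↔ (x ∈ seenA ∨ PvReach g z x) := by
        intro x; rw [h1]; exact hchar x
      have Pz := pvLevels_props g hg z
      have hkeysmem : ∀ x, x ∈ (pvLevels g (pvMassA g + 3) z).keys ↔ PvReach g z x := by
        intro x
        constructor
        · intro hx
          exact Pz.reach x ((PySem.Dict.contains_iff_mem_keys _ _).mpr hx)
        · intro hx
          exact (PySem.Dict.contains_iff_mem_keys _ _).mp (Pz.complete x hx)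
      have hmemB' : ∀ x, x ∈ PySem.Set.update seenB (pvLevels g (pvMassA g + 3) z).keys
          ↔ (x ∈ seenB ∨ PvReach g z x) := by
        intro x
        rw [PySem.Set.mem_update, hkeysmem x]
      have hmem' : ∀ x, x ∈ (pvDfsA g z (pvMassA g + 3) z (seenA, parts)).1
          ↔ x ∈ PySem.Set.update seenB (pvLevels g (pvMassA g + 3) z).keys := by
        intro x
        rw [hmemA' x, hmemB' x, hmem x]
      have hcl' : ∀ v ∈ (pvDfsA g z (pvMassA g + 3) z (seenA, parts)).1,
          ∀ w ∈ pvAdj g v, w ∈ (pvDfsA g z (pvMassA g + 3) z (seenA, parts)).1 := by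
        intro v hv w hw
        rcases (hmemA' v).mp hv with h | h
        · exact (hmemA' w).mpr (Or.inl (hcl v h w hw))
        · exact (hmemA' w).mpr (Or.inr (PvReach.step h hw))
      have hnd' : ((pvDfsA g z (pvMassA g + 3) z (seenA, parts)).1).Nodup := by
        rw [h1]; exact pvDfsS_nodup g _ z seenA hnd
      have hpk' : ∀ k ∈ (pvDfsA g z (pvMassA g + 3) z (seenA, parts)).2.keys,
          k ∈ (pvDfsA g z (pvMassA g + 3) z (seenA, parts)).1 := by
        intro k hk
        rw [hdd, pvModify_eq, PySem.Dict.keys_insert_of_not_contains _ _ hcontz] at hk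
        rcases List.mem_append.mp hk with h | h
        · exact (hmemA' k).mpr (Or.inl (hpk k h))
        · rcases List.mem_singleton.mp h with rfl
          exact (hmemA' k).mpr (Or.inr PvReach.refl)
      -- apply IH on the tail with the evolved states
      have hIH := ih (pvDfsA g z (pvMassA g + 3) z (seenA, parts)).1
        (PySem.Set.update seenB (pvLevels g (pvMassA g + 3) z).keys)
        (pvDfsA g z (pvMassA g + 3) z (seenA, parts)).2
        hmem' hcl' hnd' hpk'
      rw [show (pvDfsA g z (pvMassA g + 3) z (seenA, parts)).1
          = ((pvDfsA g z (pvMassA g + 3) z (seenA, parts)).1,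
             (pvDfsA g z (pvMassA g + 3) z (seenA, parts)).2).1 from rfl] at hIH
      rw [show ((pvDfsA g z (pvMassA g + 3) z (seenA, parts)).1,
             (pvDfsA g z (pvMassA g + 3) z (seenA, parts)).2)
          = pvDfsA g z (pvMassA g + 3) z (seenA, parts) from rfl] at hIH
      rw [hIH, hitems, pvLoopOpt_append, pvLoopOpt_single]
      rw [show pvMainOpt g (pvMassA g + 3) (z :: rest) seenB
          = (if pvCheckB g (pvLevels g (pvMassA g + 3) z) (pvLevels g (pvMassA g + 3) z).keys
              then (pvMainOpt g (pvMassA g + 3) rest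
                (PySem.Set.update seenB (pvLevels g (pvMassA g + 3) z).keys)).map
                  (fun t => (1 + pvEccB g (pvMassA g + 3) (pvLevels g (pvMassA g + 3) z).keys) + t)
              else none) by
        rw [pvMainOpt, if_neg (by rw [← hcz]; exact hseen)]]
      by_cases hbip : PvBip g z
      · rw [pvComp_contrib_bip hg hgnd z Z hZmem hbip,
          if_pos (pvCheck_of_bip hg z hbip)]
        rw [pvOadd_assoc, pvOadd_some_left]
      · rw [pvComp_contrib_nbip hg z Z hZmem hbip,
          if_neg (by simp [pvCheck_of_nbip hg z hbip])]
        rw [pvOadd_none_right]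
        rfl


theorem pv_top (n : Int) (edges : List (List Int)) : p2493 n edges = p2493_alt n edges := by
  have hg := pvGraphA_sym edges
  have hgnd := pvGraphA_nodupKeys edges
  have e1 : p2493 n edges = pvLoopA (pvGraphA edges) (pvMassA (pvGraphA edges) + 3)
      (((PySem.List.pyRange 0 n 1).foldl
        (fun st node => if st.1.contains node then st
          else pvDfsA (pvGraphA edges) node (pvMassA (pvGraphA edges) + 3) node st)
        (PySem.Set.empty, PySem.Dict.empty)).2.items) 0 := rfl
  have e2 : p2493_alt n edges = pvMainB (pvGraphA edges) (pvMassA (pvGraphA edges) + 3)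
      (PySem.List.pyRange 0 n 1) PySem.Set.empty 0 := rfl
  rw [e1, e2, pvLoopA_opt, pvMainB_opt]
  have hc := pvMain_couple hg hgnd (PySem.List.pyRange 0 n 1) PySem.Set.empty PySem.Set.empty
    PySem.Dict.empty (fun x => Iff.rfl)
    (by intro v hv; exact absurd hv (by simp [PySem.Set.empty]))
    (by simp [PySem.Set.empty])
    (by intro k hk; exact absurd hk (by simp [PySem.Dict.keys_empty]))
  rw [show pvLoopOpt (pvGraphA edges) (pvMassA (pvGraphA edges) + 3)
      (PySem.Dict.empty : PySem.Dict Int (PySem.Set Int)).items = some 0 from rfl,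
    pvOadd_zero_left] at hc
  rw [hc]


-- ===== VERDICT (by name: the statement is the Claim_ definition above) =====
theorem p2493_spec : Claim_equal_p2493 := by
  intro n edges _ _
  show p2493 n edges = p2493_alt n edges
  exact pv_top n edges
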